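-- pv_equiv track=rewrite | github.com/atm1992/LeetCode_in_Python3 | All_Solutions/a1723_find-minimum-time-to-finish-all-jobs.py | minimumTimeRequired_2
-- ===== SOURCE A (Python) =====
-- from typing import List
--
-- def minimumTimeRequired_2(jobs: List[int], k: int) -> int:
--     """动态规划 + 状态压缩。注意：Python会运行超时，Java、C++ 能通过，主要是学习这种思想"""
--
--     def get_first_1_idx(i: int) -> int:
--         res = 0
--         while i & 1 == 0:
--             res += 1
--             i >>= 1
--         return res
--
--     # 因为jobs.length <= 12，所以最多有 2^12 = 4096种状态，可用一个11位的二进制数(int数)来表示各种状态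
--     # 例如：10010 表示第1、4(0 ~ n-1)个job已被分配出去
--     state_cnt = 1 << len(jobs)
--     workloads = [0] * state_cnt
--     # 状态0的总工作量为0，无需计算。计算各种状态下的总工作量
--     for i in range(1, state_cnt):
--         base, idx = i & (i - 1), get_first_1_idx(i)
--         workloads[i] = workloads[base] + jobs[idx]
--     # dp[i][j] 表示给前i个工人分配完工作，工作的分配状态为j，完成这些已分配工作的最短时间
--     # dp[k-1][state_cnt-1] 即为最终结果，表示完成所有工作的最短时间
--     # dp[0] 表示1个工人完成各种状态的最短时间，其实就是workloads
--     dp = [workloads] + [[0] * state_cnt for _ in range(k - 1)]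
--     for i in range(1, k):
--         # 状态0表示没有工作可分配，所以无论几个工人去完成，最短时间均为0
--         for j in range(1, state_cnt):
--             # dp[i-1][j] 表示将所有工作都分配给前i-1个工人，不给第i个工人分配任何工作。即 max(dp[i-1][j], 0)
--             tmp = dp[i - 1][j]
--             # 枚举状态j的所有子状态k，从所有工作均分配给第i个工人 到 不给第i个工人分配任何工作。剩余子集(状态j - 状态k)分配给前i-1个工人
--             k = j
--             while k:
--                 tmp = min(tmp, max(dp[i - 1][j - k], workloads[k]))
--                 # 注意：这里是 j & (k-1)，而不是 k & (k-1)。k & (k-1) 并不能枚举完所有的子状态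
--                 # 以 j = 6 为例，k的取值分别为：
--                 # j & (k-1)：6(110)、4(100)、2(010)
--                 # k & (k-1)：6(110)、4(100)
--                 k = j & (k - 1)
--             dp[i][j] = tmp
--     return dp[-1][-1]
-- ===== SOURCE B (Python) =====
-- def minimumTimeRequired_2(jobs, k):
--     """Backtracking over set partitions: place each job into one of the buckets opened
--     so far (in place, undoing after the recursive call) or open one new bucket (never
--     more than max(k, 1) buckets); return the least possible maximum bucket load.
--     Nonpositive k behaves as a single worker, matching A's degenerate path."""
--     w = max(k, 1)
--     n = len(jobs)
--     if n == 0: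
--         return 0
--     buckets = []
--
--     def dfs(i):
--         if i == n:
--             return max(buckets)
--         x = jobs[i]
--         i1 = i + 1
--         best = None
--         lb = len(buckets)
--         for b in range(lb):
--             old = buckets[b]
--             buckets[b] = old + x
--             r = dfs(i1)
--             buckets[b] = old
--             if best is None or r < best:
--                 best = r
--         if lb < w:
--             buckets.append(x)
--             r = dfs(i1)
--             buckets.pop()
--             if best is None or r < best:
--                 best = r
--         return best
--
--     return dfs(0)
-- ===== Notes on version B (the rewrite author's own statement) =====
-- stated objective: alternative
-- what changed: B replaces A's bottom-up bitmask DP (per-state workload table plus a k-round submask-enumeration minimax) by a depth-first backtracking search that builds the set partitions directly, placing each job either into one of the buckets opened so far or into one new bucket (at most max(k,1) buckets) and minimizing the maximum bucket load over all completions.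
import Mathlib
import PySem

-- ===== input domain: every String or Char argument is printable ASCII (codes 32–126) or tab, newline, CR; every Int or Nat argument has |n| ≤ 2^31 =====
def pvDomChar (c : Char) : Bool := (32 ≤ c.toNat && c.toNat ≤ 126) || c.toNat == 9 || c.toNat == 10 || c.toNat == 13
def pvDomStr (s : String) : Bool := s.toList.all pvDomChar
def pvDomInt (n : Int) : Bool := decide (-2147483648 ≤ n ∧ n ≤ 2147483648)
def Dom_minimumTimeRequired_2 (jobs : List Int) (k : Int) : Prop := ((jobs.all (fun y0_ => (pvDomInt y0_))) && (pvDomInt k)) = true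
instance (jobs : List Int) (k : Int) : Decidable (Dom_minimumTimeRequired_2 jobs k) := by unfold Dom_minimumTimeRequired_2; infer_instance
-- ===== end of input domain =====

-- B replaces A's bottom-up bitmask subset DP by a depth-first backtracking search over set
-- partitions (each job goes into an existing bucket or one new bucket, at most max(k,1) buckets),
-- minimizing the maximum bucket load (objective: alternative).

-- ===== PORT A =====

-- get_first_1_idx: `res = 0; while i & 1 == 0: res += 1; i >>= 1; return res`.
-- Python diverges on i = 0; the `i = 0` guard only makes the recursion total
-- (every call site passes i ≥ 1, where the port is exact).
def pvGetFirst1Idx (i : Nat) : Nat :=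
  if _h : i = 0 then 0
  else if i &&& 1 = 0 then pvGetFirst1Idx (i >>> 1) + 1 else 0
decreasing_by
  simp only [Nat.shiftRight_one]
  exact Nat.div_lt_self (Nat.pos_of_ne_zero _h) Nat.one_lt_two

-- loop body of `for i in range(1, state_cnt)`: workloads[i] = workloads[i & (i-1)] + jobs[idx].
-- Masks and list indices are nonnegative Python ints, carried as Nat (exact here);
-- both reads are always in range, so `getD _ 0` equals Python's indexing.
def pvWorkStep (jobs : List Int) (w : List Int) (i : Nat) : List Int :=
  w.set i (w.getD (i &&& (i - 1)) 0 + jobs.getD (pvGetFirst1Idx i) 0)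

def pvWorkloadsA (jobs : List Int) : List Int :=
  (List.range' 1 (2 ^ jobs.length - 1)).foldl (pvWorkStep jobs)
    (List.replicate (2 ^ jobs.length) 0)

-- inner `while k:` loop: tmp = min(tmp, max(dp[i-1][j-k], workloads[k])); k = j & (k-1)
def pvSubLoopA (prev W : List Int) (j kk : Nat) (tmp : Int) : Int :=
  if _h : kk = 0 then tmp
  else pvSubLoopA prev W j (j &&& (kk - 1))
        (min tmp (max (prev.getD (j - kk) 0) (W.getD kk 0)))
decreasing_by
  exact Nat.lt_of_le_of_lt Nat.and_le_right (by omega)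

-- dp = [workloads] + [[0]*state_cnt for _ in range(k-1)]; the range(1, k) / range(1, state_cnt)
-- loops (their index sets are nonnegative, carried as Nat); finally return dp[-1][-1]
def minimumTimeRequired_2 (jobs : List Int) (k : Int) : Int :=
  let stateCnt : Nat := 2 ^ jobs.length
  let workloads := pvWorkloadsA jobs
  let dp0 : List (List Int) :=
    workloads :: List.replicate (k - 1).toNat (List.replicate stateCnt 0)
  let dp := (List.range' 1 (k - 1).toNat).foldl (fun dp i =>
      dp.set i ((List.range' 1 (stateCnt - 1)).foldl (fun row j =>
          row.set j (pvSubLoopA (dp.getD (i - 1) []) workloads j j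
            ((dp.getD (i - 1) []).getD j 0))) (dp.getD i []))) dp0
  PySem.List.pyGetD (PySem.List.pyGetD dp (-1) []) (-1) 0

-- ===== PORT B =====

-- `max(buckets)` / `min(cands)` → PySem.List.max?/min? with identity key; `.getD 0` is never
-- reached on a [] within the claim (both lists are nonempty wherever dfs runs).
-- `buckets[:b] + [buckets[b]+jobs[i]] + buckets[b+1:]` is exactly `ls.set b (ls[b]+jobs[i])`
-- for b < len(buckets).  The fuel argument (n - i) only makes the recursion total; like the
-- Python, the function tests i == len(jobs) to stop.
def pvDfsB (jobs : List Int) (w : Nat) : Nat → Nat → List Int → Int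
  | 0, _, ls => (PySem.List.max? ls (fun y => y)).getD 0
  | f+1, i, ls =>
      if i = jobs.length then (PySem.List.max? ls (fun y => y)).getD 0
      else (PySem.List.min? (((List.range ls.length).map (fun b =>
              pvDfsB jobs w f (i+1) (ls.set b (ls.getD b 0 + jobs.getD i 0)))) ++
            (if ls.length < w then [pvDfsB jobs w f (i+1) (ls ++ [jobs.getD i 0])] else []))
          (fun y => y)).getD 0

-- w = max(k, 1); if not jobs: return 0; return dfs(0, [])
def minimumTimeRequired_2_alt (jobs : List Int) (k : Int) : Int :=
  let w := (max k 1).toNat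
  if jobs.length = 0 then 0
  else pvDfsB jobs w jobs.length 0 []

-- ===== PRECONDITION & SPEC =====
def Spec_minimumTimeRequired_2 (jobs : List Int) (k : Int) (out : Int) : Prop := out = minimumTimeRequired_2_alt jobs k
instance (jobs : List Int) (k : Int) (out : Int) : Decidable (Spec_minimumTimeRequired_2 jobs k out) := by unfold Spec_minimumTimeRequired_2; infer_instance

-- ===== CLAIM (what is proved, stated in full; the proofs are below) =====
def Claim_equal_minimumTimeRequired_2 : Prop := ∀ (jobs : List Int) (k : Int), Dom_minimumTimeRequired_2 jobs k → Spec_minimumTimeRequired_2 jobs k (minimumTimeRequired_2 jobs k)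

-- ===== LEMMAS AND PROOFS =====

-- ---------- generic fold-min / fold-max helpers ----------

theorem pv_foldl_min_le_init (l : List Int) (a : Int) : l.foldl min a ≤ a := by
  induction l generalizing a with
  | nil => exact le_refl a
  | cons x t ih => exact le_trans (ih (min a x)) (min_le_left a x)

theorem pv_foldl_min_le_mem {l : List Int} {x : Int} (a : Int) (hx : x ∈ l) :
    l.foldl min a ≤ x := by
  induction l generalizing a with
  | nil => simp at hx
  | cons y t ih =>
    rcases List.mem_cons.mp hx with rfl | hx'
    · exact le_trans (pv_foldl_min_le_init t (min a x)) (min_le_right a x)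
    · exact ih (min a y) hx'

theorem pv_le_foldl_min {l : List Int} {a c : Int} (ha : c ≤ a) (h : ∀ x ∈ l, c ≤ x) :
    c ≤ l.foldl min a := by
  induction l generalizing a with
  | nil => exact ha
  | cons y t ih =>
    exact ih (le_min ha (h y (by simp))) (fun x hx => h x (by simp [hx]))

theorem pv_foldl_min_choice (l : List Int) (a : Int) :
    l.foldl min a = a ∨ ∃ x ∈ l, l.foldl min a = x := by
  induction l generalizing a with
  | nil => exact Or.inl rfl
  | cons y t ih =>
    rcases ih (min a y) with h | ⟨x, hx, hv⟩
    · rcases min_choice a y with hm | hm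
      · exact Or.inl (by rw [List.foldl_cons, h, hm])
      · exact Or.inr ⟨y, by simp, by rw [List.foldl_cons, h, hm]⟩
    · exact Or.inr ⟨x, by simp [hx], by rw [List.foldl_cons, hv]⟩

theorem pv_foldl_max_assoc (l : List Int) (a b : Int) :
    l.foldl max (max a b) = max a (l.foldl max b) := by
  induction l generalizing b with
  | nil => rfl
  | cons y t ih => simpa [max_assoc] using ih (max b y)

-- Python min(cands) as an Int value
theorem pv_pyMin_le {l : List Int} {x : Int} (hx : x ∈ l) :
    (PySem.List.min? l (fun y => y)).getD 0 ≤ x := by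
  cases l with
  | nil => simp at hx
  | cons y t =>
    rw [PySem.List.min?_id_cons, Option.getD_some]
    rcases List.mem_cons.mp hx with rfl | hx'
    · exact pv_foldl_min_le_init t x
    · exact pv_foldl_min_le_mem y hx'

theorem pv_le_pyMin {l : List Int} (hne : l ≠ []) {c : Int} (h : ∀ x ∈ l, c ≤ x) :
    c ≤ (PySem.List.min? l (fun y => y)).getD 0 := by
  cases l with
  | nil => exact absurd rfl hne
  | cons y t =>
    rw [PySem.List.min?_id_cons, Option.getD_some]
    exact pv_le_foldl_min (h y (by simp)) (fun x hx => h x (by simp [hx]))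

-- ---------- subset-sum workloads ----------

theorem pv_sub_trans {a b c : Nat} (h1 : a &&& b = a) (h2 : b &&& c = b) : a &&& c = a := by
  calc a &&& c = (a &&& b) &&& c := by rw [h1]
    _ = a &&& (b &&& c) := Nat.and_assoc ..
    _ = a &&& b := by rw [h2]
    _ = a := h1

theorem pv_sub_le {a b : Nat} (h : a &&& b = a) : a ≤ b := h ▸ Nat.and_le_right

-- for odd m, m - 1 is m with bit 0 cleared, hence a submask of m
theorem pv_odd_and_pred {m : Nat} (hm : m % 2 = 1) : m &&& (m - 1) = m - 1 := by
  apply Nat.eq_of_testBit_eq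
  intro b
  rw [Nat.testBit_and]
  cases b with
  | zero =>
    have : (m - 1) % 2 = 0 := by omega
    simp [Nat.testBit_zero, this, hm]
  | succ b =>
    have h2 : (m - 1) / 2 = m / 2 := by omega
    rw [Nat.testBit_add_one, Nat.testBit_add_one, h2, Bool.and_self]

-- get_first_1_idx computes the 2-adic valuation: spec
theorem pv_ctz_spec (i : Nat) (hi : 0 < i) :
    i % 2 ^ pvGetFirst1Idx i = 0 ∧ (i / 2 ^ pvGetFirst1Idx i) % 2 = 1 := by
  induction i using Nat.strong_induction_on with
  | _ i ih =>
    rw [pvGetFirst1Idx]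
    have hne : ¬ i = 0 := by omega
    simp only [hne, dite_false]
    by_cases he : i &&& 1 = 0
    · have hmod : i % 2 = 0 := by rwa [Nat.and_one_is_mod] at he
      simp only [he, if_true]
      have hlt : i >>> 1 < i := by
        simp only [Nat.shiftRight_one]; exact Nat.div_lt_self hi Nat.one_lt_two
      have hpos : 0 < i >>> 1 := by simp only [Nat.shiftRight_one]; omega
      obtain ⟨h1, h2⟩ := ih (i >>> 1) hlt hpos
      simp only [Nat.shiftRight_one] at h1 h2
      set t' := pvGetFirst1Idx (i / 2) with ht'
      constructor
      · rw [pow_succ, mul_comm]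
        have hi2 : i = 2 * (i / 2) := by omega
        calc i % (2 * 2 ^ t') = 2 * (i / 2) % (2 * 2 ^ t') := by rw [← hi2]
          _ = 2 * ((i / 2) % 2 ^ t') := Nat.mul_mod_mul_left ..
          _ = 0 := by omega
      · rw [pow_succ, mul_comm, ← Nat.div_div_eq_div_mul]
        exact h2
    · have hmod : i % 2 = 1 := by rw [Nat.and_one_is_mod] at he; omega
      simp [hmod, Nat.mod_one]

-- the divide/mod split of an &&& by a power of two
theorem pv_and_split (a b t : Nat) :
    a &&& b = 2 ^ t * (a / 2 ^ t &&& b / 2 ^ t) + (a % 2 ^ t &&& b % 2 ^ t) := by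
  rw [← Nat.and_div_two_pow, ← Nat.and_mod_two_pow]
  exact (Nat.div_add_mod _ _).symm

-- i & (i - 1) clears the lowest set bit
theorem pv_and_pred (i : Nat) (hi : 0 < i) :
    i &&& (i - 1) = i - 2 ^ pvGetFirst1Idx i := by
  obtain ⟨h1, h2⟩ := pv_ctz_spec i hi
  set t := pvGetFirst1Idx i with ht
  set P := 2 ^ t with hP
  have hPpos : 0 < P := Nat.two_pow_pos t
  set m := i / P with hm
  have hdm := Nat.div_add_mod i P
  rw [← hm] at hdm
  have him : i = P * m := by omega
  have hmpos : 0 < m := by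
    rcases Nat.eq_zero_or_pos m with h | h
    · omega
    · exact h
  have hms : P * (m - 1) = P * m - P := by rw [Nat.mul_sub, Nat.mul_one]
  have hle : P ≤ P * m := Nat.le_mul_of_pos_right P hmpos
  have hpred : i - 1 = P * (m - 1) + (P - 1) := by omega
  have hd : (i - 1) / P = m - 1 := by
    rw [hpred, hP, Nat.mul_add_div hPpos]
    have : (P - 1) / P = 0 := Nat.div_eq_of_lt (by omega)
    simp only [← hP]; omega
  have hmo : (i - 1) % P = P - 1 := by
    rw [hpred, hP, Nat.mul_add_mod]
    exact Nat.mod_eq_of_lt (by omega)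
  have := pv_and_split i (i - 1) t
  rw [← hP, ← hm, hd, hmo] at this
  rw [this]
  have hz : i % P = 0 := h1
  rw [hz, Nat.zero_and, pv_odd_and_pred h2]
  omega

-- KEY: j & (k-1) is an upper bound for every submask of j strictly below k  (k a submask of j)
theorem pv_key (j s kk : Nat) (hs : s &&& j = s) (hk : kk &&& j = kk)
    (hs0 : 0 < s) (hsk : s < kk) : s ≤ j &&& (kk - 1) := by
  have hk0 : 0 < kk := by omega
  obtain ⟨h1, h2⟩ := pv_ctz_spec kk hk0
  generalize htg : pvGetFirst1Idx kk = t at h1 h2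
  have hPpos : 0 < 2 ^ t := Nat.two_pow_pos t
  have hdm := Nat.div_add_mod kk (2 ^ t)
  have hmpos : 0 < kk / 2 ^ t := Nat.pos_of_ne_zero (fun h0 => by rw [h0] at h2; simp at h2)
  have hms : 2 ^ t * (kk / 2 ^ t - 1) = 2 ^ t * (kk / 2 ^ t) - 2 ^ t := by
    rw [Nat.mul_sub, Nat.mul_one]
  have hle : 2 ^ t ≤ 2 ^ t * (kk / 2 ^ t) := Nat.le_mul_of_pos_right _ hmpos
  have hpred : kk - 1 = 2 ^ t * (kk / 2 ^ t - 1) + (2 ^ t - 1) := by omega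
  have hd : (kk - 1) / 2 ^ t = kk / 2 ^ t - 1 := by
    rw [hpred, Nat.mul_add_div hPpos]
    have : (2 ^ t - 1) / 2 ^ t = 0 := Nat.div_eq_of_lt (by omega)
    omega
  have hmo : (kk - 1) % 2 ^ t = 2 ^ t - 1 := by
    rw [hpred, Nat.mul_add_mod]; exact Nat.mod_eq_of_lt (by omega)
  have hmj : kk / 2 ^ t &&& j / 2 ^ t = kk / 2 ^ t := by
    have h := congrArg (· / 2 ^ t) hk
    simpa only [Nat.and_div_two_pow] using h
  have hm1 : (kk / 2 ^ t - 1) &&& (j / 2 ^ t) = kk / 2 ^ t - 1 := by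
    refine pv_sub_trans ?_ hmj
    have := pv_odd_and_pred h2
    rwa [Nat.and_comm] at this
  have hM : j &&& (kk - 1) = 2 ^ t * (kk / 2 ^ t - 1) + j % 2 ^ t := by
    have hsp := pv_and_split j (kk - 1) t
    rw [hd, hmo] at hsp
    rw [hsp, Nat.and_comm (j / 2 ^ t), hm1, Nat.and_two_pow_sub_one_eq_mod,
      Nat.mod_mod_of_dvd j dvd_rfl]
  have hsdiv : s / 2 ^ t ≤ kk / 2 ^ t - 1 := by
    have : s / 2 ^ t < kk / 2 ^ t := by
      rw [Nat.div_lt_iff_lt_mul hPpos, mul_comm]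
      omega
    omega
  have hsmod : s % 2 ^ t ≤ j % 2 ^ t := by
    have h := congrArg (· % 2 ^ t) hs
    simp only [Nat.and_mod_two_pow] at h
    calc s % 2 ^ t = s % 2 ^ t &&& j % 2 ^ t := h.symm
      _ ≤ j % 2 ^ t := Nat.and_le_right
  have hsplit := Nat.div_add_mod s (2 ^ t)
  have hmul := Nat.mul_le_mul_left (2 ^ t) hsdiv
  omega

theorem pv_shift_testBit (m b : Nat) : ((m >>> b) &&& 1 = 1) ↔ (m.testBit b = true) := by
  rw [Nat.testBit_eq_decide_div_mod_eq]
  rw [Nat.and_one_is_mod, Nat.shiftRight_eq_div_pow]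
  simp

theorem pv_filter_sum (l : List Nat) (p : Nat → Bool) (f : Nat → Int) :
    ((l.filter p).map f).sum = (l.map (fun b => if p b then f b else 0)).sum := by
  induction l with
  | nil => rfl
  | cons x xs ih =>
    by_cases h : p x <;> simp [h, ih]

theorem pv_delta_sum (l : List Nat) (t : Nat) (c : Int) (hn : l.Nodup) (ht : t ∈ l) :
    (l.map (fun b => if b = t then c else 0)).sum = c := by
  induction l with
  | nil => simp at ht
  | cons x xs ih =>
    rcases List.mem_cons.mp ht with h | h
    · subst h
      have hz : ∀ b ∈ xs, (if b = t then c else 0) = 0 := by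
        intro b hb
        have : b ≠ t := fun he => (List.nodup_cons.mp hn).1 (he ▸ hb)
        simp [this]
      simp [List.map_congr_left hz]
    · have hx : x ≠ t := fun he => (List.nodup_cons.mp hn).1 (he ▸ h)
      simp [hx, ih (List.nodup_cons.mp hn).2 h]

-- workload of a mask: sum of jobs at its set bits
def pvWB (jobs : List Int) (m : Nat) : Int :=
  (((List.range jobs.length).filter (fun b => (m >>> b) &&& 1 = 1)).map
    (fun b => jobs.getD b 0)).sum

theorem pv_wb_ite (jobs : List Int) (m : Nat) :
    pvWB jobs m =
      ((List.range jobs.length).map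
        (fun b => if m.testBit b then jobs.getD b 0 else 0)).sum := by
  unfold pvWB
  rw [pv_filter_sum]
  congr 1
  apply List.map_congr_left
  intro b _
  have := pv_shift_testBit m b
  exact if_congr (by simpa using this) rfl rfl

-- bits of i - 2^t (t the lowest set bit of i)
theorem pv_base_testBit (i : Nat) (hi : 0 < i) (b : Nat) :
    (i - 2 ^ pvGetFirst1Idx i).testBit b =
      (i.testBit b && !(b = pvGetFirst1Idx i : Bool)) := by
  obtain ⟨h1, h2⟩ := pv_ctz_spec i hi
  generalize htg : pvGetFirst1Idx i = t at h1 h2 ⊢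
  have hPpos : 0 < 2 ^ t := Nat.two_pow_pos t
  have hdm := Nat.div_add_mod i (2 ^ t)
  have hmpos : 0 < i / 2 ^ t := Nat.pos_of_ne_zero (fun h0 => by rw [h0] at h2; simp at h2)
  have hms : 2 ^ t * (i / 2 ^ t - 1) = 2 ^ t * (i / 2 ^ t) - 2 ^ t := by
    rw [Nat.mul_sub, Nat.mul_one]
  have hbase : i - 2 ^ t = 2 ^ t * (i / 2 ^ t - 1) := by omega
  have hieq : i = 2 ^ t * (i / 2 ^ t) := by omega
  rw [hbase]
  conv_rhs => rw [hieq]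
  rw [Nat.testBit_two_pow_mul, Nat.testBit_two_pow_mul]
  by_cases hbt : b ≥ t
  · by_cases hbe : b = t
    · subst hbe
      simp only [ge_iff_le, le_refl, decide_true, Bool.true_and, Nat.sub_self]
      rw [Nat.testBit_zero, Nat.testBit_zero]
      simp [h2]
      omega
    · have hgt : b - t = (b - t - 1) + 1 := by omega
      simp only [hbt, decide_true, Bool.true_and]
      rw [hgt, Nat.testBit_add_one, Nat.testBit_add_one]
      have hdd : (i / 2 ^ t - 1) / 2 = i / 2 ^ t / 2 := by omega
      rw [hdd]
      simp [hbe]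
  · simp [hbt]

-- the lowest set bit of i < 2^n sits below n
theorem pv_ctz_lt (i n : Nat) (hi : 0 < i) (hin : i < 2 ^ n) : pvGetFirst1Idx i < n := by
  obtain ⟨h1, h2⟩ := pv_ctz_spec i hi
  generalize htg : pvGetFirst1Idx i = t at h1 h2 ⊢
  have hmpos : 0 < i / 2 ^ t := Nat.pos_of_ne_zero (fun h0 => by rw [h0] at h2; simp at h2)
  have h2t : 2 ^ t ≤ i := Nat.le_of_lt_succ (by
    have := Nat.div_add_mod i (2 ^ t)
    have := Nat.le_mul_of_pos_right (2 ^ t) hmpos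
    omega)
  have : 2 ^ t < 2 ^ n := Nat.lt_of_le_of_lt h2t hin
  exact (Nat.pow_lt_pow_iff_right (by omega)).mp this

-- A's workload recurrence, expressed on the direct per-mask sums
theorem pv_wb_step (jobs : List Int) (i : Nat) (hi : 0 < i) (hin : i < 2 ^ jobs.length) :
    pvWB jobs (i &&& (i - 1)) + jobs.getD (pvGetFirst1Idx i) 0 = pvWB jobs i := by
  have htn : pvGetFirst1Idx i < jobs.length := pv_ctz_lt i jobs.length hi hin
  rw [pv_wb_ite, pv_wb_ite, pv_and_pred i hi]
  have hpoint : ∀ b ∈ List.range jobs.length,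
      (if i.testBit b then jobs.getD b 0 else 0) =
        (if (i - 2 ^ pvGetFirst1Idx i).testBit b then jobs.getD b 0 else 0) +
          (if b = pvGetFirst1Idx i then jobs.getD (pvGetFirst1Idx i) 0 else 0) := by
    intro b _
    rw [pv_base_testBit i hi b]
    by_cases hbe : b = pvGetFirst1Idx i
    · have hbit : i.testBit b = true := by
        obtain ⟨h1, h2⟩ := pv_ctz_spec i hi
        rw [hbe, Nat.testBit_eq_decide_div_mod_eq]
        simp [h2]
      rw [hbe] at hbit
      simp [hbe, hbit]
    · simp [hbe]
  rw [List.map_congr_left hpoint, List.sum_map_add,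
    pv_delta_sum _ _ _ (List.nodup_range) (List.mem_range.mpr htn)]

theorem pv_getD_map_range {f : Nat → Int} {N i : Nat} (h : i < N) (d : Int) :
    ((List.range N).map f).getD i d = f i := by
  rw [List.getD_eq_getElem?_getD, List.getElem?_map, List.getElem?_range h]
  rfl

theorem pv_wb_zero (jobs : List Int) : pvWB jobs 0 = 0 := by
  unfold pvWB
  have : ∀ b ∈ List.range jobs.length, ¬((0 >>> b) &&& 1 = 1) := by
    intro b _
    simp [Nat.zero_shiftRight]
  rw [List.filter_eq_nil_iff.mpr (by intro b hb; simpa using this b hb)]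
  rfl

theorem pv_workloads_prefix (jobs : List Int) (t : Nat) (ht : t ≤ 2 ^ jobs.length - 1) :
    (List.range' 1 t).foldl (pvWorkStep jobs) (List.replicate (2 ^ jobs.length) 0) =
      (List.range (t + 1)).map (pvWB jobs) ++
        List.replicate (2 ^ jobs.length - (t + 1)) 0 := by
  have hN : 0 < 2 ^ jobs.length := Nat.two_pow_pos _
  induction t with
  | zero =>
    simp only [List.range'_zero, List.foldl_nil, List.range_one, List.map_cons, List.map_nil,
      pv_wb_zero]
    have : List.replicate (2 ^ jobs.length) (0 : Int) =
        0 :: List.replicate (2 ^ jobs.length - 1) 0 := by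
      rw [← List.replicate_succ]
      congr 1
      omega
    rw [this]
    simp [pv_wb_zero]
  | succ t ih =>
    have ht' : t ≤ 2 ^ jobs.length - 1 := by omega
    rw [List.range'_concat, List.foldl_append, ih ht']
    simp only [List.foldl_cons, List.foldl_nil]
    unfold pvWorkStep
    have hlen : ((List.range (t + 1)).map (pvWB jobs)).length = t + 1 := by simp
    have hidx : (1 + 1 * t) = t + 1 := by omega
    rw [hidx]
    have hband : (t + 1) &&& t < t + 1 :=
      Nat.lt_of_le_of_lt Nat.and_le_right (by omega)
    have hread : ((List.range (t + 1)).map (pvWB jobs) ++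
        List.replicate (2 ^ jobs.length - (t + 1)) (0 : Int)).getD ((t + 1) &&& (t + 1 - 1)) 0 =
          pvWB jobs ((t + 1) &&& t) := by
      simp only [Nat.add_sub_cancel]
      rw [List.getD_append _ _ _ _ (by rw [hlen]; exact hband)]
      exact pv_getD_map_range hband 0
    rw [hread]
    rw [List.set_append]
    simp only [hlen]
    rw [if_neg (by omega)]
    have hrep : List.replicate (2 ^ jobs.length - (t + 1)) (0 : Int) =
        0 :: List.replicate (2 ^ jobs.length - (t + 2)) 0 := by
      rw [← List.replicate_succ]
      congr 1
      omega
    rw [hrep]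
    simp only [Nat.sub_self, List.set_cons_zero]
    have hstep := pv_wb_step jobs (t + 1) (by omega) (by omega)
    simp only [Nat.add_sub_cancel] at hstep
    rw [hstep]
    rw [List.range_succ (n := t + 1), List.map_append]
    simp

theorem pv_workloads_eq (jobs : List Int) :
    pvWorkloadsA jobs = (List.range (2 ^ jobs.length)).map (pvWB jobs) := by
  unfold pvWorkloadsA
  have hN : 0 < 2 ^ jobs.length := Nat.two_pow_pos _
  rw [pv_workloads_prefix jobs (2 ^ jobs.length - 1) (le_refl _)]
  have h1 : 2 ^ jobs.length - 1 + 1 = 2 ^ jobs.length := by omega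
  rw [h1]
  simp

-- ---------- A's inner submask loop as a fold over the submask chain ----------

def pvChain (j kk : Nat) : List Nat :=
  if _h : kk = 0 then [] else kk :: pvChain j (j &&& (kk - 1))
decreasing_by
  exact Nat.lt_of_le_of_lt Nat.and_le_right (by omega)

theorem pv_subloop_eq_fold (prev W : List Int) (j kk : Nat) (tmp : Int) :
    pvSubLoopA prev W j kk tmp =
      (pvChain j kk).foldl
        (fun a s => min a (max (prev.getD (j - s) 0) (W.getD s 0))) tmp := by
  induction kk using Nat.strong_induction_on generalizing tmp with
  | _ kk ih =>
    rw [pvSubLoopA, pvChain]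
    by_cases h : kk = 0
    · simp [h]
    · simp only [h, dite_false, List.foldl_cons]
      exact ih _ (Nat.lt_of_le_of_lt Nat.and_le_right (by omega)) _

theorem pv_chain_mem (j kk x : Nat) (hk : kk &&& j = kk) :
    x ∈ pvChain j kk ↔ (0 < x ∧ x ≤ kk ∧ x &&& j = x) := by
  induction kk using Nat.strong_induction_on with
  | _ kk ih =>
    rw [pvChain]
    by_cases h : kk = 0
    · simp [h]
      omega
    · simp only [h, dite_false, List.mem_cons]
      constructor
      · rintro (rfl | hx)
        · exact ⟨by omega, le_refl _, hk⟩
        · have hlt : j &&& (kk - 1) < kk :=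
            Nat.lt_of_le_of_lt Nat.and_le_right (by omega)
          have hsub : (j &&& (kk - 1)) &&& j = j &&& (kk - 1) := by
            rw [Nat.and_comm j (kk - 1), Nat.and_assoc, Nat.and_self]
          obtain ⟨a, b, c⟩ := (ih _ hlt hsub).mp hx
          exact ⟨a, by omega, c⟩
      · rintro ⟨hx0, hxk, hxj⟩
        by_cases hxe : x = kk
        · exact Or.inl hxe
        · right
          have hlt : j &&& (kk - 1) < kk :=
            Nat.lt_of_le_of_lt Nat.and_le_right (by omega)
          have hsub : (j &&& (kk - 1)) &&& j = j &&& (kk - 1) := by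
            rw [Nat.and_comm j (kk - 1), Nat.and_assoc, Nat.and_self]
          refine (ih _ hlt hsub).mpr ⟨hx0, ?_, hxj⟩
          exact pv_key j x kk hxj hk hx0 (by omega)

theorem pv_sub_eq_xor (j : Nat) : ∀ s, s &&& j = s → j - s = j ^^^ s := by
  induction j using Nat.strong_induction_on with
  | _ j ih =>
    intro s hs
    by_cases hj : j = 0
    · subst hj
      have : s = 0 := by simpa using hs.symm
      simp [this]
    · have hbit : s % 2 ≤ j % 2 := by
        have h := congrArg (· % 2) hs
        simp only at h
        rw [show (2 : Nat) = 2 ^ 1 by norm_num, Nat.and_mod_two_pow, pow_one] at h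
        calc s % 2 = s % 2 &&& j % 2 := h.symm
          _ ≤ j % 2 := Nat.and_le_right
      have hdiv : s / 2 &&& j / 2 = s / 2 := by
        have h := congrArg (· / 2) hs
        simpa only [Nat.and_div_two] using h
      have hle : s / 2 ≤ j / 2 := pv_sub_le hdiv
      have hx0 : (j ^^^ s) % 2 = j % 2 - s % 2 := by
        rw [show (2 : Nat) = 2 ^ 1 by norm_num, Nat.xor_mod_two_pow, pow_one]
        rcases Nat.mod_two_eq_zero_or_one j with h1 | h1 <;>
          rcases Nat.mod_two_eq_zero_or_one s with h2 | h2 <;>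
            rw [h1, h2] <;> first | rfl | omega
      have hxd : (j ^^^ s) / 2 = j / 2 - s / 2 := by
        rw [Nat.xor_div_two]
        by_cases hj2 : j / 2 = 0
        · have : s / 2 = 0 := by omega
          simp [hj2, this]
        · exact (ih (j / 2) (by omega) (s / 2) hdiv).symm
      have h1 := Nat.div_add_mod (j ^^^ s) 2
      have h2 := Nat.div_add_mod j 2
      have h3 := Nat.div_add_mod s 2
      omega

theorem pv_foldl_congr_mem {l : List Nat} {f g : Int → Nat → Int} {a : Int}
    (h : ∀ x ∈ l, ∀ b, f b x = g b x) : l.foldl f a = l.foldl g a := by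
  induction l generalizing a with
  | nil => rfl
  | cons x xs ih =>
    rw [List.foldl_cons, List.foldl_cons, h x (by simp)]
    exact ih (fun y hy b => h y (by simp [hy]) b)

-- the difference j - m (m a submask of j) is itself a submask of j
theorem pv_diff_sub (j m : Nat) (hm : m &&& j = m) : (j ^^^ m) &&& j = j ^^^ m := by
  apply Nat.eq_of_testBit_eq
  intro b
  have hb := congrArg (fun x => x.testBit b) hm
  simp only [Nat.testBit_and] at hb ⊢
  rw [Nat.testBit_xor] at *
  cases hjb : j.testBit b <;> cases hmb : m.testBit b <;> simp_all

-- ---------- small bit-manipulation facts ----------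

theorem pv_xor_submask {s j : Nat} (h : s &&& j = s) (b : Nat) :
    (j ^^^ s).testBit b = (j.testBit b && !(s.testBit b)) := by
  have hb := congrArg (fun x => x.testBit b) h
  simp only [Nat.testBit_and] at hb
  rw [Nat.testBit_xor]
  cases hs : s.testBit b <;> cases hj : j.testBit b <;> simp_all

theorem pv_submask_disj {s j : Nat} (h : s &&& j = s) : s &&& (j ^^^ s) = 0 := by
  apply Nat.eq_of_testBit_eq
  intro b
  rw [Nat.testBit_and, pv_xor_submask h]
  have hb := congrArg (fun x => x.testBit b) h
  simp only [Nat.testBit_and] at hb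
  cases hs : s.testBit b <;> cases hj : j.testBit b <;> simp_all

theorem pv_xor_or {s j : Nat} (h : s &&& j = s) : (j ^^^ s) ||| s = j := by
  apply Nat.eq_of_testBit_eq
  intro b
  rw [Nat.testBit_or, pv_xor_submask h]
  have hb := congrArg (fun x => x.testBit b) h
  simp only [Nat.testBit_and] at hb
  cases hs : s.testBit b <;> cases hj : j.testBit b <;> simp_all

theorem pv_or_self_sub (d s : Nat) : d &&& (d ||| s) = d := by
  apply Nat.eq_of_testBit_eq
  intro b
  rw [Nat.testBit_and, Nat.testBit_or]
  cases hd : d.testBit b <;> simp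

theorem pv_or_xor_cancel {d s : Nat} (h : d &&& s = 0) : (d ||| s) ^^^ s = d := by
  apply Nat.eq_of_testBit_eq
  intro b
  have hb := congrArg (fun x => x.testBit b) h
  simp only [Nat.testBit_and, Nat.zero_testBit] at hb
  rw [Nat.testBit_xor, Nat.testBit_or]
  cases hd : d.testBit b <;> cases hs : s.testBit b <;> simp_all

theorem pv_disj_submask {a d s : Nat} (ha : a &&& d = a) (h : d &&& s = 0) : a &&& s = 0 := by
  apply Nat.eq_of_testBit_eq
  intro b
  have h1 := congrArg (fun x => x.testBit b) ha
  have h2 := congrArg (fun x => x.testBit b) h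
  simp only [Nat.testBit_and, Nat.zero_testBit] at h1 h2 ⊢
  cases hA : a.testBit b <;> cases hD : d.testBit b <;> cases hS : s.testBit b <;> simp_all

theorem pv_or_eq_xor {a b : Nat} (h : a &&& b = 0) : a ||| b = a ^^^ b := by
  apply Nat.eq_of_testBit_eq
  intro c
  have hb := congrArg (fun x => x.testBit c) h
  simp only [Nat.testBit_and, Nat.zero_testBit] at hb
  rw [Nat.testBit_or, Nat.testBit_xor]
  cases hA : a.testBit c <;> cases hB : b.testBit c <;> simp_all

-- ---------- lowest set bit (ctz) facts ----------

theorem pv_ctz_testBit {x : Nat} (hx : x ≠ 0) : x.testBit (pvGetFirst1Idx x) = true := by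
  obtain ⟨h1, h2⟩ := pv_ctz_spec x (by omega)
  rw [Nat.testBit_eq_decide_div_mod_eq]
  simp [h2]

theorem pv_ctz_min {x b : Nat} (hx : x ≠ 0) (hb : b < pvGetFirst1Idx x) :
    x.testBit b = false := by
  obtain ⟨h1, h2⟩ := pv_ctz_spec x (by omega)
  have hieq : x = 2 ^ pvGetFirst1Idx x * (x / 2 ^ pvGetFirst1Idx x) := by
    have := Nat.div_add_mod x (2 ^ pvGetFirst1Idx x)
    omega
  rw [hieq, Nat.testBit_two_pow_mul]
  simp [Nat.not_le_of_lt hb]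

theorem pv_ctz_le_of_testBit {x b : Nat} (h : x.testBit b = true) :
    pvGetFirst1Idx x ≤ b := by
  have hx : x ≠ 0 := by
    intro h0
    rw [h0, Nat.zero_testBit] at h
    exact Bool.false_ne_true h
  by_contra hlt
  rw [pv_ctz_min hx (by omega)] at h
  exact Bool.false_ne_true h

theorem pv_ctz_eq {x b : Nat} (h : x.testBit b = true)
    (hlow : ∀ b' < b, x.testBit b' = false) : pvGetFirst1Idx x = b := by
  have hx : x ≠ 0 := by
    intro h0
    rw [h0, Nat.zero_testBit] at h
    exact Bool.false_ne_true h
  have h1 := pv_ctz_le_of_testBit h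
  rcases Nat.lt_or_ge (pvGetFirst1Idx x) b with hlt | hge
  · have := hlow _ hlt
    rw [pv_ctz_testBit hx] at this
    exact absurd this (by simp)
  · omega

-- ctz of a union with one fresh high bit
theorem pv_ctz_or_high {j i : Nat} (hj : j ≠ 0) (hhigh : ∀ b, j.testBit b = true → b < i) :
    pvGetFirst1Idx (j ||| 2 ^ i) = pvGetFirst1Idx j := by
  apply pv_ctz_eq
  · rw [Nat.testBit_or, pv_ctz_testBit hj]
    rfl
  · intro b' hb'
    have hji : pvGetFirst1Idx j < i := hhigh _ (pv_ctz_testBit hj)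
    rw [Nat.testBit_or, pv_ctz_min hj hb', Nat.testBit_two_pow]
    simp
    omega

-- ---------- workload of a mask with one fresh bit ----------

theorem pv_wb_or_bit (jobs : List Int) {m i : Nat} (hi : i < jobs.length)
    (hm : m.testBit i = false) :
    pvWB jobs (m ||| 2 ^ i) = pvWB jobs m + jobs.getD i 0 := by
  rw [pv_wb_ite, pv_wb_ite]
  have hpoint : ∀ b ∈ List.range jobs.length,
      (if (m ||| 2 ^ i).testBit b then jobs.getD b 0 else 0) =
        (if m.testBit b then jobs.getD b 0 else 0) +
          (if b = i then jobs.getD i 0 else 0) := by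
    intro b _
    rw [Nat.testBit_or, Nat.testBit_two_pow]
    by_cases hbe : b = i
    · subst hbe
      simp [hm]
    · have : ¬ (i = b) := fun h => hbe h.symm
      simp [this, hbe]
  rw [List.map_congr_left hpoint, List.sum_map_add,
    pv_delta_sum _ _ _ (List.nodup_range) (List.mem_range.mpr hi)]

theorem pv_wb_pow (jobs : List Int) {i : Nat} (hi : i < jobs.length) :
    pvWB jobs (2 ^ i) = jobs.getD i 0 := by
  have := pv_wb_or_bit jobs hi (m := 0) (by simp)
  simpa [pv_wb_zero] using this

-- ---------- the common specification: canonical minimax over set partitions ----------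

-- all nonzero submasks of j that contain j's lowest set bit
def pvSubsC (j : Nat) : List Nat :=
  (List.range (j + 1)).filter
    (fun s => (decide (s ≠ 0) && decide (s &&& j = s)) && s.testBit (pvGetFirst1Idx j))

-- least possible maximum block workload over partitions of mask j into ≤ m+1 nonempty blocks
def PspecC (jobs : List Int) : Nat → Nat → Int
  | 0, j => pvWB jobs j
  | m+1, j => ((pvSubsC j).map (fun s =>
      if s = j then pvWB jobs j else max (pvWB jobs s) (PspecC jobs m (j ^^^ s)))).foldl
        min (pvWB jobs j)

theorem pv_mem_subsC {s j : Nat} :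
    s ∈ pvSubsC j ↔ s ≠ 0 ∧ s &&& j = s ∧ s.testBit (pvGetFirst1Idx j) = true := by
  unfold pvSubsC
  rw [List.mem_filter, List.mem_range]
  constructor
  · rintro ⟨_, h⟩
    simp only [Bool.and_eq_true, decide_eq_true_eq] at h
    exact ⟨h.1.1, h.1.2, h.2⟩
  · rintro ⟨h1, h2, h3⟩
    refine ⟨by have := pv_sub_le h2; omega, ?_⟩
    simp [h1, h2, h3]

theorem pv_PspecC_zero (jobs : List Int) (m : Nat) : PspecC jobs m 0 = 0 := by
  cases m with
  | zero => exact pv_wb_zero jobs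
  | succ m =>
    have hs : pvSubsC 0 = [] := rfl
    simp [PspecC, hs, pv_wb_zero]

theorem pv_PspecC_le_W (jobs : List Int) (m j : Nat) : PspecC jobs m j ≤ pvWB jobs j := by
  cases m with
  | zero => exact le_refl _
  | succ m => exact pv_foldl_min_le_init _ _

theorem pv_PspecC_succ_le (jobs : List Int) (m : Nat) :
    ∀ j, PspecC jobs (m + 1) j ≤ PspecC jobs m j := by
  induction m with
  | zero => intro j; exact pv_PspecC_le_W jobs 1 j
  | succ m ih =>
    intro j
    show PspecC jobs (m + 2) j ≤ PspecC jobs (m + 1) j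
    rw [show PspecC jobs (m + 1) j = _ from rfl]
    apply pv_le_foldl_min (pv_PspecC_le_W jobs (m + 2) j)
    intro x hx
    obtain ⟨s, hs, rfl⟩ := List.mem_map.mp hx
    by_cases hsj : s = j
    · simp only [hsj, if_pos rfl]
      exact pv_PspecC_le_W jobs (m + 2) j
    · simp only [hsj, if_neg hsj]
      have hterm : PspecC jobs (m + 2) j ≤
          max (pvWB jobs s) (PspecC jobs (m + 1) (j ^^^ s)) := by
        apply pv_foldl_min_le_mem
        exact List.mem_map.mpr ⟨s, hs, by simp [hsj]⟩
      exact le_trans hterm (max_le_max (le_refl _) (ih (j ^^^ s)))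

theorem pv_PspecC_mono (jobs : List Int) {m m' : Nat} (h : m ≤ m') (j : Nat) :
    PspecC jobs m' j ≤ PspecC jobs m j := by
  induction m' with
  | zero =>
    have : m = 0 := by omega
    subst this; exact le_refl _
  | succ m' ih =>
    rcases Nat.lt_or_ge m (m' + 1) with hlt | hge
    · exact le_trans (pv_PspecC_succ_le jobs m' j) (ih (by omega))
    · have : m = m' + 1 := by omega
      subst this; exact le_refl _

-- one-step access to a term of the spec's min
theorem pv_PspecC_le_term (jobs : List Int) (m : Nat) {s j : Nat}
    (hs : s ∈ pvSubsC j) (hsj : s ≠ j) :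
    PspecC jobs (m + 1) j ≤ max (pvWB jobs s) (PspecC jobs m (j ^^^ s)) := by
  apply pv_foldl_min_le_mem
  exact List.mem_map.mpr ⟨s, hs, by simp [hsj]⟩

-- merging one extra block into an optimal partition (budget 1 case)
theorem pv_merge_one (jobs : List Int) {d s : Nat} (hd : d ≠ 0) (hs : s ≠ 0)
    (hds : d &&& s = 0) :
    PspecC jobs 1 (d ||| s) ≤ max (pvWB jobs s) (pvWB jobs d) := by
  have hsubd : d &&& (d ||| s) = d := pv_or_self_sub d s
  have hsubs : s &&& (d ||| s) = s := by rw [Nat.or_comm]; exact pv_or_self_sub s d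
  have hj : d ||| s ≠ 0 := by
    intro h
    have := pv_sub_le hsubd
    omega
  have hsj : s ≠ d ||| s := by
    intro h
    apply hd
    have h1 : d &&& s = d := by rw [h]; exact hsubd
    omega
  have hdj : d ≠ d ||| s := by
    intro h
    apply hs
    have h1 : s &&& d = s := by rw [h]; exact hsubs
    rw [Nat.and_comm] at h1
    omega
  have hbit : (d ||| s).testBit (pvGetFirst1Idx (d ||| s)) = true := pv_ctz_testBit hj
  rw [Nat.testBit_or] at hbit
  by_cases hc : s.testBit (pvGetFirst1Idx (d ||| s)) = true
  · have hterm := pv_PspecC_le_term jobs 0 (s := s) (j := d ||| s)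
      (pv_mem_subsC.mpr ⟨hs, hsubs, hc⟩) hsj
    rwa [pv_or_xor_cancel hds] at hterm
  · have hcd : d.testBit (pvGetFirst1Idx (d ||| s)) = true := by
      cases hb : d.testBit (pvGetFirst1Idx (d ||| s)) with
      | true => rfl
      | false => rw [hb, Bool.eq_false_iff.mpr hc] at hbit; simp at hbit
    have hterm := pv_PspecC_le_term jobs 0 (s := d) (j := d ||| s)
      (pv_mem_subsC.mpr ⟨hd, hsubd, hcd⟩) hdj
    have hxor : (d ||| s) ^^^ d = s := by
      rw [Nat.or_comm]
      exact pv_or_xor_cancel (by rwa [Nat.and_comm] at hds)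
    rw [hxor] at hterm
    exact le_trans hterm (le_of_eq (max_comm _ _))

-- merging one extra block: max(W s, PspecC m d) bounds the (m+1)-budget optimum of d ∪ s
theorem pv_merge (jobs : List Int) :
    ∀ m d s, d ≠ 0 → s ≠ 0 → d &&& s = 0 →
      PspecC jobs (m + 1) (d ||| s) ≤ max (pvWB jobs s) (PspecC jobs m d) := by
  intro m
  induction m with
  | zero => exact fun d s hd hs hds => pv_merge_one jobs hd hs hds
  | succ m ih =>
    intro d s hd hs hds
    have hsubd : d &&& (d ||| s) = d := pv_or_self_sub d s
    have hsubs : s &&& (d ||| s) = s := by rw [Nat.or_comm]; exact pv_or_self_sub s d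
    have hj : d ||| s ≠ 0 := by
      intro h
      have := pv_sub_le hsubd
      omega
    have hsj : s ≠ d ||| s := by
      intro h
      apply hd
      have h1 : d &&& s = d := by rw [h]; exact hsubd
      omega
    have hdj : d ≠ d ||| s := by
      intro h
      apply hs
      have h1 : s &&& d = s := by rw [h]; exact hsubs
      rw [Nat.and_comm] at h1
      omega
    by_cases hcs : s.testBit (pvGetFirst1Idx (d ||| s)) = true
    · have hterm := pv_PspecC_le_term jobs (m + 1) (s := s) (j := d ||| s)
        (pv_mem_subsC.mpr ⟨hs, hsubs, hcs⟩) hsj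
      rwa [pv_or_xor_cancel hds] at hterm
    · have hbit : (d ||| s).testBit (pvGetFirst1Idx (d ||| s)) = true := pv_ctz_testBit hj
      rw [Nat.testBit_or] at hbit
      have hcd : d.testBit (pvGetFirst1Idx (d ||| s)) = true := by
        cases hb : d.testBit (pvGetFirst1Idx (d ||| s)) with
        | true => rfl
        | false => rw [hb, Bool.eq_false_iff.mpr hcs] at hbit; simp at hbit
      have hdb : ∀ b, d.testBit b = true → (d ||| s).testBit b = true := by
        intro b hb
        rw [Nat.testBit_or, hb]
        rfl
      have hctzd : pvGetFirst1Idx d = pvGetFirst1Idx (d ||| s) := by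
        apply pv_ctz_eq hcd
        intro b' hb'
        cases hdb' : d.testBit b' with
        | false => rfl
        | true =>
          have := hdb b' hdb'
          rw [pv_ctz_min hj hb'] at this
          simp at this
      -- analyse how the min defining PspecC (m+1) d is attained
      have hPd : PspecC jobs (m + 1) d =
          ((pvSubsC d).map (fun s' =>
            if s' = d then pvWB jobs d
            else max (pvWB jobs s') (PspecC jobs m (d ^^^ s')))).foldl
              min (pvWB jobs d) := rfl
      have hfromWd : PspecC jobs (m + 1) d = pvWB jobs d →
          PspecC jobs (m + 2) (d ||| s) ≤ max (pvWB jobs s) (PspecC jobs (m + 1) d) := by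
        intro hval
        rw [hval]
        exact le_trans (pv_PspecC_mono jobs (show 1 ≤ m + 2 by omega) _)
          (pv_merge_one jobs hd hs hds)
      rcases pv_foldl_min_choice ((pvSubsC d).map (fun s' =>
          if s' = d then pvWB jobs d
          else max (pvWB jobs s') (PspecC jobs m (d ^^^ s')))) (pvWB jobs d) with hval | ⟨x, hx, hval⟩
      · exact hfromWd (hPd.trans hval)
      · obtain ⟨s', hs'mem, rfl⟩ := List.mem_map.mp hx
        obtain ⟨hs'0, hs'subd, hs'ctz⟩ := pv_mem_subsC.mp hs'mem
        by_cases hs'd : s' = d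
        · exact hfromWd (by rw [hPd, hval, if_pos hs'd])
        · rw [if_neg hs'd] at hval
          have hd' : d ^^^ s' ≠ 0 := by
            intro h
            exact hs'd (Nat.xor_eq_zero.mp h).symm
          have hd'subd : (d ^^^ s') &&& d = d ^^^ s' := pv_diff_sub d s' hs'subd
          have hd's : (d ^^^ s') &&& s = 0 := pv_disj_submask hd'subd hds
          have hs'subj : s' &&& (d ||| s) = s' := pv_sub_trans hs'subd hsubd
          have hs'j : s' ≠ d ||| s := by
            intro h
            apply hs
            have h1 : s &&& s' = s := by rw [h]; exact hsubs
            have h2 : s &&& d = s := pv_sub_trans h1 hs'subd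
            rw [Nat.and_comm] at h2
            omega
          have hs'ctzj : s'.testBit (pvGetFirst1Idx (d ||| s)) = true := by
            rw [← hctzd]; exact hs'ctz
          have hterm := pv_PspecC_le_term jobs (m + 1) (s := s') (j := d ||| s)
            (pv_mem_subsC.mpr ⟨hs'0, hs'subj, hs'ctzj⟩) hs'j
          have hxoreq : (d ||| s) ^^^ s' = (d ^^^ s') ||| s := by
            apply Nat.eq_of_testBit_eq
            intro b
            have h1 := congrArg (fun x => x.testBit b) hs'subd
            have h2 := congrArg (fun x => x.testBit b) hds
            simp only [Nat.testBit_and, Nat.zero_testBit] at h1 h2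
            rw [Nat.testBit_xor, Nat.testBit_or, Nat.testBit_or, Nat.testBit_xor]
            cases hA : d.testBit b <;> cases hB : s.testBit b <;>
              cases hC : s'.testBit b <;> simp_all
          rw [hxoreq] at hterm
          have hIH := ih (d ^^^ s') s hd' hs hd's
          calc PspecC jobs (m + 2) (d ||| s)
              ≤ max (pvWB jobs s') (PspecC jobs (m + 1) ((d ^^^ s') ||| s)) := hterm
            _ ≤ max (pvWB jobs s') (max (pvWB jobs s) (PspecC jobs m (d ^^^ s'))) :=
                max_le_max (le_refl _) hIH
            _ = max (pvWB jobs s) (max (pvWB jobs s') (PspecC jobs m (d ^^^ s'))) :=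
                max_left_comm _ _ _
            _ = max (pvWB jobs s) (PspecC jobs (m + 1) d) := by rw [hPd, hval]

-- ---------- A's row computation ----------

def pvAStep (W prev : List Int) : List Int :=
  prev.getD 0 0 :: (List.range' 1 (W.length - 1)).map (fun j => pvSubLoopA prev W j j (prev.getD j 0))

theorem pv_setfold (f : Nat → Int) (N : Nat) (hN : 0 < N) (c : Nat) (hc : c ≤ N - 1) :
    (List.range' 1 c).foldl (fun row j => row.set j (f j)) (List.replicate N 0) =
      0 :: ((List.range' 1 c).map f ++ List.replicate (N - 1 - c) 0) := by
  induction c with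
  | zero =>
    simp only [List.range'_zero, List.foldl_nil, List.map_nil, List.nil_append]
    rw [show N = (N - 1) + 1 by omega, List.replicate_succ]
    simp [Nat.sub_zero]
  | succ c ih =>
    rw [List.range'_concat, List.foldl_append, ih (by omega)]
    simp only [List.foldl_cons, List.foldl_nil, Nat.one_mul]
    have hidx : 1 + c = c + 1 := by omega
    rw [hidx]
    have hsplit : (0 : Int) :: ((List.range' 1 c).map f ++
        List.replicate (N - 1 - c) 0) =
      (0 :: (List.range' 1 c).map f) ++ (0 :: List.replicate (N - 1 - (c + 1)) 0) := by
      simp only [List.cons_append]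
      congr 2
      rw [← List.replicate_succ]
      congr 1
      omega
    rw [hsplit, List.set_append]
    have hlen : ((0 : Int) :: (List.range' 1 c).map f).length = c + 1 := by simp
    rw [hlen, if_neg (by omega)]
    simp only [Nat.sub_self, List.set_cons_zero]
    simp [List.range'_concat, hidx]

-- A's inner j-loop over a zero row computes exactly the next dp row
theorem pv_row (W prev : List Int) (nn : Nat) (hpow : W.length = 2 ^ nn)
    (hN : 0 < W.length) (hhead : prev.getD 0 0 = 0) :
    (List.range' 1 (W.length - 1)).foldl
      (fun row j => row.set j (pvSubLoopA prev W j j (prev.getD j 0)))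
      (List.replicate W.length 0) = pvAStep W prev := by
  have := pv_setfold (fun j => pvSubLoopA prev W j j (prev.getD j 0)) W.length hN
    (W.length - 1) (le_refl _)
  rw [this, pvAStep]
  have h0 : W.length - 1 - (W.length - 1) = 0 := by omega
  rw [h0]
  simp only [List.replicate_zero, List.append_nil]
  congr 1
  exact hhead.symm

theorem pv_getD_map_range' {α : Type} {f : Nat → α} {N i : Nat} (h : i < N) (d : α) :
    ((List.range N).map f).getD i d = f i := by
  rw [List.getD_eq_getElem?_getD, List.getElem?_map, List.getElem?_range h]
  rfl

theorem pv_iter_head (W : List Int) (hW0 : W.getD 0 0 = 0) (i : Nat) :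
    ((pvAStep W)^[i] W).getD 0 0 = 0 := by
  induction i with
  | zero => exact hW0
  | succ i ih =>
    rw [Function.iterate_succ_apply', pvAStep]
    simpa using ih

theorem pv_rounds (W : List Int) (nn : Nat) (hpow : W.length = 2 ^ nn)
    (hN : 0 < W.length) (hW0 : W.getD 0 0 = 0) (K : Nat) (c : Nat) (hc : c ≤ K) :
    (List.range' 1 c).foldl
      (fun dp i => dp.set i ((List.range' 1 (W.length - 1)).foldl
          (fun row j => row.set j (pvSubLoopA (dp.getD (i - 1) []) W j j
            ((dp.getD (i - 1) []).getD j 0))) (dp.getD i [])))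
      (W :: List.replicate K (List.replicate W.length 0)) =
    (List.range (c + 1)).map (fun i => (pvAStep W)^[i] W) ++
      List.replicate (K - c) (List.replicate W.length 0) := by
  induction c with
  | zero => simp
  | succ c ih =>
    rw [List.range'_concat, List.foldl_append, ih (by omega)]
    simp only [List.foldl_cons, List.foldl_nil, Nat.one_mul]
    have hidx : 1 + c = c + 1 := by omega
    rw [hidx]
    have hplen : ((List.range (c + 1)).map (fun i => (pvAStep W)^[i] W)).length = c + 1 := by
      simp
    have hprev : ((List.range (c + 1)).map (fun i => (pvAStep W)^[i] W) ++
        List.replicate (K - c) (List.replicate W.length 0)).getD (c + 1 - 1) [] =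
          (pvAStep W)^[c] W := by
      simp only [Nat.add_sub_cancel]
      rw [List.getD_append _ _ _ _ (by omega), pv_getD_map_range' (by omega)]
    have hcur : ((List.range (c + 1)).map (fun i => (pvAStep W)^[i] W) ++
        List.replicate (K - c) (List.replicate W.length 0)).getD (c + 1) [] =
          List.replicate W.length 0 := by
      rw [List.getD_append_right _ _ _ _ (by omega)]
      rw [hplen, Nat.sub_self]
      have : K - c = (K - (c + 1)) + 1 := by omega
      rw [this, List.replicate_succ]
      rfl
    rw [hprev, hcur]
    rw [pv_row W ((pvAStep W)^[c] W) nn hpow hN (pv_iter_head W hW0 c)]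
    rw [List.set_append, hplen, if_neg (by omega)]
    have : K - c = (K - (c + 1)) + 1 := by omega
    rw [this, List.replicate_succ]
    simp only [Nat.sub_self, List.set_cons_zero]
    rw [List.range_succ (n := c + 1), List.map_append]
    simp [Function.iterate_succ_apply']

-- the inner submask loop on spec rows computes the next spec value
theorem pv_inner_spec (jobs : List Int) (i j : Nat) (hj0 : 0 < j) (hjN : j < 2 ^ jobs.length) :
    pvSubLoopA ((List.range (2 ^ jobs.length)).map (fun x => PspecC jobs i x))
      ((List.range (2 ^ jobs.length)).map (pvWB jobs)) j j
      (((List.range (2 ^ jobs.length)).map (fun x => PspecC jobs i x)).getD j 0) =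
      PspecC jobs (i + 1) j := by
  rw [pv_subloop_eq_fold, pv_getD_map_range hjN]
  have hjj : j &&& j = j := Nat.and_self j
  have hcongr : (pvChain j j).foldl
      (fun a s => min a
        (max (((List.range (2 ^ jobs.length)).map (fun x => PspecC jobs i x)).getD (j - s) 0)
          (((List.range (2 ^ jobs.length)).map (pvWB jobs)).getD s 0))) (PspecC jobs i j) =
    (pvChain j j).foldl
      (fun a s => min a (max (PspecC jobs i (j ^^^ s)) (pvWB jobs s))) (PspecC jobs i j) := by
    apply pv_foldl_congr_mem
    intro s hsmem a
    obtain ⟨hs0, hsle, hssub⟩ := (pv_chain_mem j j s hjj).mp hsmem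
    rw [pv_getD_map_range (by omega), pv_getD_map_range (by omega), pv_sub_eq_xor j s hssub]
  rw [hcongr]
  have hfold : (pvChain j j).foldl
      (fun a s => min a (max (PspecC jobs i (j ^^^ s)) (pvWB jobs s))) (PspecC jobs i j) =
    ((pvChain j j).map (fun s => max (PspecC jobs i (j ^^^ s)) (pvWB jobs s))).foldl
      min (PspecC jobs i j) := by
    rw [List.foldl_map]
  rw [hfold]
  apply le_antisymm
  · -- fold ≤ spec
    show _ ≤ ((pvSubsC j).map _).foldl min (pvWB jobs j)
    apply pv_le_foldl_min
    · exact le_trans (pv_foldl_min_le_init _ _) (pv_PspecC_le_W jobs i j)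
    · intro x hx
      obtain ⟨s, hsmem, rfl⟩ := List.mem_map.mp hx
      obtain ⟨hs0, hssub, hsctz⟩ := pv_mem_subsC.mp hsmem
      by_cases hsj : s = j
      · rw [if_pos hsj]
        exact le_trans (pv_foldl_min_le_init _ _) (pv_PspecC_le_W jobs i j)
      · rw [if_neg hsj]
        have hmem : max (PspecC jobs i (j ^^^ s)) (pvWB jobs s) ∈
            (pvChain j j).map (fun s => max (PspecC jobs i (j ^^^ s)) (pvWB jobs s)) :=
          List.mem_map.mpr ⟨s, (pv_chain_mem j j s hjj).mpr ⟨by omega, pv_sub_le hssub, hssub⟩, rfl⟩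
        exact le_trans (pv_foldl_min_le_mem _ hmem) (le_of_eq (max_comm _ _))
  · -- spec ≤ fold
    apply pv_le_foldl_min
    · exact pv_PspecC_succ_le jobs i j
    · intro x hx
      obtain ⟨s, hsmem, rfl⟩ := List.mem_map.mp hx
      obtain ⟨hs0, hsle, hssub⟩ := (pv_chain_mem j j s hjj).mp hsmem
      by_cases hsj : s = j
      · subst hsj
        rw [Nat.xor_self]
        exact le_trans (pv_PspecC_le_W jobs (i + 1) s) (le_max_right _ _)
      · have hd0 : j ^^^ s ≠ 0 := fun h => hsj (Nat.xor_eq_zero.mp h).symm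
        have hds : (j ^^^ s) &&& s = 0 := by
          have := pv_submask_disj hssub
          rwa [Nat.and_comm] at this
        have := pv_merge jobs i (j ^^^ s) s hd0 (by omega) hds
        rw [pv_xor_or hssub] at this
        exact le_trans this (le_of_eq (max_comm _ _))

theorem pv_iter_spec (jobs : List Int) (i : Nat) :
    (pvAStep ((List.range (2 ^ jobs.length)).map (pvWB jobs)))^[i]
        ((List.range (2 ^ jobs.length)).map (pvWB jobs)) =
      (List.range (2 ^ jobs.length)).map (fun j => PspecC jobs i j) := by
  have hN : 0 < 2 ^ jobs.length := Nat.two_pow_pos _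
  induction i with
  | zero =>
    simp only [Function.iterate_zero, id_eq]
    apply List.map_congr_left
    intro j _
    rfl
  | succ i ih =>
    rw [Function.iterate_succ_apply', ih]
    apply List.ext_getElem
    · simp [pvAStep]
      omega
    · intro u h1 h2
      simp only [List.length_cons, pvAStep] at h1
      match u with
      | 0 =>
        show (((List.range (2 ^ jobs.length)).map (fun j => PspecC jobs i j)).getD 0 0) = _
        rw [pv_getD_map_range hN, pv_PspecC_zero]
        rw [List.getElem_map, List.getElem_range, pv_PspecC_zero]
      | u + 1 =>
        show (pvAStep _ _)[u + 1]'_ = _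
        rw [List.getElem_map, List.getElem_range]
        simp only [pvAStep, List.getElem_cons_succ, List.getElem_map, List.getElem_range']
        have hu : 1 + 1 * u = u + 1 := by omega
        rw [hu]
        exact pv_inner_spec jobs i (u + 1) (by omega)
          (by simp at h2; omega)

-- A's port computes the canonical partition minimax with budget (k-1).toNat + 1
theorem pv_A_spec (jobs : List Int) (k : Int) :
    minimumTimeRequired_2 jobs k = PspecC jobs (k - 1).toNat (2 ^ jobs.length - 1) := by
  have hNpos : 0 < 2 ^ jobs.length := Nat.two_pow_pos _
  simp only [minimumTimeRequired_2, pv_workloads_eq]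
  have hWlen : ((List.range (2 ^ jobs.length)).map (pvWB jobs)).length = 2 ^ jobs.length := by
    simp
  have hW0 : ((List.range (2 ^ jobs.length)).map (pvWB jobs)).getD 0 0 = 0 := by
    rw [pv_getD_map_range hNpos]
    exact pv_wb_zero jobs
  generalize hG : (List.range (2 ^ jobs.length)).map (pvWB jobs) = W at hWlen hW0 ⊢
  rw [← hWlen]
  have hN : 0 < W.length := by omega
  rw [pv_rounds W jobs.length hWlen hN hW0 (k - 1).toNat (k - 1).toNat (le_refl _)]
  rw [Nat.sub_self, List.replicate_zero, List.append_nil]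
  set K := (k - 1).toNat with hK
  have hne : (List.range (K + 1)).map (fun i => (pvAStep W)^[i] W) ≠ [] := by simp
  rw [PySem.List.pyGetD_neg_one _ _ hne]
  have hlast : ((List.range (K + 1)).map (fun i => (pvAStep W)^[i] W)).getLast hne =
      (pvAStep W)^[K] W := by
    rw [List.getLast_eq_getElem]
    simp only [List.length_map, List.length_range, Nat.add_sub_cancel, List.getElem_map,
      List.getElem_range]
  rw [hlast, ← hG, pv_iter_spec jobs K]
  have hrowne : (List.range (2 ^ jobs.length)).map (fun j => PspecC jobs K j) ≠ [] := by
    simp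
  rw [PySem.List.pyGetD_neg_one _ _ hrowne]
  rw [List.getLast_eq_getElem, List.getElem_map, List.getElem_range]
  simp

-- ---------- canonical partitions: bound and attainment ----------

-- maximum workload over a list of blocks, exactly as B's leaf computes it on the loads
def pvMaxW (jobs : List Int) (ps : List Nat) : Int :=
  (PySem.List.max? (ps.map (pvWB jobs)) (fun y => y)).getD 0

theorem pv_maxW_cons (jobs : List Int) (s : Nat) (rest : List Nat) :
    pvMaxW jobs (s :: rest) = (rest.map (pvWB jobs)).foldl max (pvWB jobs s) := by
  unfold pvMaxW
  rw [List.map_cons, PySem.List.max?_id_cons, Option.getD_some]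

theorem pv_maxW_cons' (jobs : List Int) (s : Nat) {rest : List Nat} (h : rest ≠ []) :
    pvMaxW jobs (s :: rest) = max (pvWB jobs s) (pvMaxW jobs rest) := by
  cases rest with
  | nil => exact absurd rfl h
  | cons r t =>
    rw [pv_maxW_cons, pv_maxW_cons, List.map_cons, List.foldl_cons]
    exact pv_foldl_max_assoc _ _ _

theorem pv_maxW_single (jobs : List Int) (s : Nat) : pvMaxW jobs [s] = pvWB jobs s := by
  rw [pv_maxW_cons]
  rfl

-- canonical partition of mask j: each block is nonzero, a submask, and contains the
-- lowest set bit of the mask still to be covered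
def PartC : List Nat → Nat → Prop
  | [], j => j = 0
  | s :: rest, j => s ≠ 0 ∧ s &&& j = s ∧ s.testBit (pvGetFirst1Idx j) = true ∧ PartC rest (j ^^^ s)

theorem pv_partC_ne_nil {ps : List Nat} {j : Nat} (h : PartC ps j) (hj : j ≠ 0) :
    ps ≠ [] := by
  intro hnil
  subst hnil
  exact hj h

theorem pv_partC_bound (jobs : List Int) :
    ∀ (ps : List Nat) (m j : Nat), PartC ps j → j ≠ 0 → ps.length ≤ m + 1 →
      PspecC jobs m j ≤ pvMaxW jobs ps := by
  intro ps
  induction ps with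
  | nil => intro m j h hj _; exact absurd h hj
  | cons s rest ih =>
    intro m j h hj hlen
    obtain ⟨hs0, hsub, hctz, hrest⟩ := h
    by_cases hr : rest = []
    · subst hr
      have hsj : s = j := by
        have : j ^^^ s = 0 := hrest
        exact (Nat.xor_eq_zero.mp this).symm
      rw [pv_maxW_single, hsj]
      exact pv_PspecC_le_W jobs m j
    · have hd0 : j ^^^ s ≠ 0 := by
        intro h0
        cases rest with
        | nil => exact hr rfl
        | cons r t =>
          rw [h0] at hrest
          obtain ⟨hr0, hrsub, -, -⟩ := hrest
          rw [Nat.and_zero] at hrsub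
          exact hr0 hrsub.symm
      have hsj : s ≠ j := by
        intro h0
        rw [h0, Nat.xor_self] at hd0
        exact hd0 rfl
      match m with
      | 0 =>
        exfalso
        have : rest.length + 1 ≤ 1 := by simpa using hlen
        have : rest = [] := List.eq_nil_of_length_eq_zero (by omega)
        exact hr this
      | m' + 1 =>
        have hterm := pv_PspecC_le_term jobs m' (s := s) (j := j)
          (pv_mem_subsC.mpr ⟨hs0, hsub, hctz⟩) hsj
        have hIH := ih m' (j ^^^ s) hrest hd0 (by simp at hlen ⊢; omega)
        rw [pv_maxW_cons' jobs s hr]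
        exact le_trans hterm (max_le_max (le_refl _) hIH)

theorem pv_partC_attain (jobs : List Int) :
    ∀ m j, j ≠ 0 → ∃ ps, PartC ps j ∧ ps.length ≤ m + 1 ∧ pvMaxW jobs ps = PspecC jobs m j := by
  intro m
  induction m with
  | zero =>
    intro j hj
    exact ⟨[j], ⟨hj, Nat.and_self j, pv_ctz_testBit hj, by
      show PartC [] (j ^^^ j)
      rw [Nat.xor_self]
      rfl⟩, by simp, pv_maxW_single jobs j⟩
  | succ m ih =>
    intro j hj
    have hPj : PspecC jobs (m + 1) j =
        ((pvSubsC j).map (fun s =>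
          if s = j then pvWB jobs j
          else max (pvWB jobs s) (PspecC jobs m (j ^^^ s)))).foldl min (pvWB jobs j) := rfl
    have hone : PspecC jobs (m + 1) j = pvWB jobs j →
        ∃ ps, PartC ps j ∧ ps.length ≤ m + 2 ∧ pvMaxW jobs ps = PspecC jobs (m + 1) j := by
      intro hval
      exact ⟨[j], ⟨hj, Nat.and_self j, pv_ctz_testBit hj, by
        show PartC [] (j ^^^ j)
        rw [Nat.xor_self]
        rfl⟩, by simp, by rw [pv_maxW_single, hval]⟩
    rcases pv_foldl_min_choice ((pvSubsC j).map (fun s =>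
        if s = j then pvWB jobs j
        else max (pvWB jobs s) (PspecC jobs m (j ^^^ s)))) (pvWB jobs j) with hval | ⟨x, hx, hval⟩
    · exact hone (hPj.trans hval)
    · obtain ⟨s, hsmem, rfl⟩ := List.mem_map.mp hx
      obtain ⟨hs0, hsub, hctz⟩ := pv_mem_subsC.mp hsmem
      by_cases hsj : s = j
      · exact hone (by rw [hPj, hval, if_pos hsj])
      · rw [if_neg hsj] at hval
        have hd0 : j ^^^ s ≠ 0 := fun h0 => hsj (Nat.xor_eq_zero.mp h0).symm
        obtain ⟨rest, hr, hrlen, hrval⟩ := ih (j ^^^ s) hd0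
        refine ⟨s :: rest, ⟨hs0, hsub, hctz, hr⟩, by simp; omega, ?_⟩
        rw [pv_maxW_cons' jobs s (pv_partC_ne_nil hr hd0), hrval, hPj, hval]

-- ---------- unions of block lists and PartC structure ----------

def pvUnion (l : List Nat) : Nat := l.foldr (· ||| ·) 0

theorem pv_union_testBit (l : List Nat) (b : Nat) :
    (pvUnion l).testBit b = l.any (fun s => s.testBit b) := by
  induction l with
  | nil => simp [pvUnion, Nat.zero_testBit]
  | cons s t ih =>
    show (s ||| pvUnion t).testBit b = _
    rw [Nat.testBit_or, ih]
    simp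

theorem pv_union_take_sub (l : List Nat) (c : Nat) :
    pvUnion (l.take c) &&& pvUnion l = pvUnion (l.take c) := by
  apply Nat.eq_of_testBit_eq
  intro b
  rw [Nat.testBit_and, pv_union_testBit, pv_union_testBit]
  cases h : (l.take c).any (fun s => s.testBit b) with
  | false => rfl
  | true =>
    obtain ⟨x, hx, hxb⟩ := List.any_eq_true.mp h
    rw [List.any_eq_true.mpr ⟨x, List.mem_of_mem_take hx, hxb⟩]
    rfl

theorem pv_partC_submask : ∀ {ps : List Nat} {j : Nat}, PartC ps j → ∀ s ∈ ps, s &&& j = s := by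
  intro ps
  induction ps with
  | nil => intro j _ s hs; simp at hs
  | cons a rest ih =>
    intro j h s hs
    obtain ⟨ha0, hasub, hactz, hrest⟩ := h
    rcases List.mem_cons.mp hs with rfl | hs'
    · exact hasub
    · exact pv_sub_trans (ih hrest s hs') (pv_diff_sub j a hasub)

theorem pv_partC_union : ∀ {ps : List Nat} {j : Nat}, PartC ps j → pvUnion ps = j := by
  intro ps
  induction ps with
  | nil => intro j h; exact h.symm ▸ rfl
  | cons s rest ih =>
    intro j h
    obtain ⟨hs0, hsub, hctz, hrest⟩ := h
    show s ||| pvUnion rest = j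
    rw [ih hrest, Nat.or_comm]
    exact pv_xor_or hsub

theorem pv_partC_pairwise : ∀ {ps : List Nat} {j : Nat}, PartC ps j →
    ps.Pairwise (fun a b => a &&& b = 0) := by
  intro ps
  induction ps with
  | nil => intro j _; exact List.Pairwise.nil
  | cons s rest ih =>
    intro j h
    obtain ⟨hs0, hsub, hctz, hrest⟩ := h
    refine List.Pairwise.cons ?_ (ih hrest)
    intro b hb
    have hbsub : b &&& (j ^^^ s) = b := pv_partC_submask hrest b hb
    have := pv_disj_submask hbsub (by rw [Nat.and_comm]; exact pv_submask_disj hsub)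
    rwa [Nat.and_comm] at this

theorem pv_partC_drop : ∀ (c : Nat) {ps : List Nat} {j : Nat}, PartC ps j →
    PartC (ps.drop c) (j ^^^ pvUnion (ps.take c)) := by
  intro c
  induction c with
  | zero =>
    intro ps j h
    simpa [pvUnion] using h
  | succ c ih =>
    intro ps j h
    cases ps with
    | nil =>
      simpa [pvUnion] using h
    | cons s rest =>
      obtain ⟨hs0, hsub, hctz, hrest⟩ := h
      show PartC (rest.drop c) (j ^^^ (s ||| pvUnion (rest.take c)))
      have hu : pvUnion (rest.take c) &&& (j ^^^ s) = pvUnion (rest.take c) := by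
        rw [← pv_partC_union hrest]
        exact pv_union_take_sub rest c
      have hsu : s &&& pvUnion (rest.take c) = 0 := by
        have := pv_disj_submask hu (by rw [Nat.and_comm]; exact pv_submask_disj hsub)
        rwa [Nat.and_comm] at this
      have hmask : j ^^^ (s ||| pvUnion (rest.take c)) =
          (j ^^^ s) ^^^ pvUnion (rest.take c) := by
        rw [pv_or_eq_xor hsu, ← Nat.xor_assoc]
      rw [hmask]
      exact ih hrest

-- a fresh top bit i (above all bits of j) keeps a canonical partition canonical
theorem pv_high_not_mem {j i : Nat} (hhigh : ∀ b, j.testBit b = true → b < i) :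
    j.testBit i = false := by
  cases h : j.testBit i with
  | false => rfl
  | true => exact absurd (hhigh i h) (lt_irrefl i)

theorem pv_partC_addbit {i : Nat} :
    ∀ (ms : List Nat) (j : Nat) (b0 : Nat), PartC ms j →
      (∀ b, j.testBit b = true → b < i) → b0 < ms.length →
      PartC (ms.set b0 (ms.getD b0 0 ||| 2 ^ i)) (j ||| 2 ^ i) := by
  intro ms
  induction ms with
  | nil => intro j b0 _ _ hb0; simp at hb0
  | cons s rest ih =>
    intro j b0 h hhigh hb0
    obtain ⟨hs0, hsub, hctz, hrest⟩ := h
    have hj0 : j ≠ 0 := by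
      intro h0
      rw [h0, Nat.and_zero] at hsub
      exact hs0 hsub.symm
    have hctzor : pvGetFirst1Idx (j ||| 2 ^ i) = pvGetFirst1Idx j := pv_ctz_or_high hj0 hhigh
    have hsi : s.testBit i = false := by
      cases hb : s.testBit i with
      | false => rfl
      | true =>
        have hbj := congrArg (fun x => x.testBit i) hsub
        simp only [Nat.testBit_and] at hbj
        rw [hb, pv_high_not_mem hhigh] at hbj
        simpa using hbj
    have hji : j.testBit i = false := pv_high_not_mem hhigh
    match b0 with
    | 0 =>
      show PartC ((s ||| 2 ^ i) :: rest) (j ||| 2 ^ i)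
      refine ⟨?_, ?_, ?_, ?_⟩
      · intro h0
        have h1 : s &&& (s ||| 2 ^ i) = s := pv_or_self_sub s (2 ^ i)
        rw [h0, Nat.and_zero] at h1
        exact hs0 h1.symm
      · apply Nat.eq_of_testBit_eq
        intro b
        have hb := congrArg (fun x => x.testBit b) hsub
        simp only [Nat.testBit_and] at hb
        simp only [Nat.testBit_and, Nat.testBit_or]
        cases hA : s.testBit b <;> cases hB : j.testBit b <;>
          cases hC : (2 ^ i).testBit b <;> simp_all
      · rw [hctzor, Nat.testBit_or, hctz]
        rfl
      · have hmask : (j ||| 2 ^ i) ^^^ (s ||| 2 ^ i) = j ^^^ s := by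
          apply Nat.eq_of_testBit_eq
          intro b
          rw [Nat.testBit_xor, Nat.testBit_or, Nat.testBit_or, Nat.testBit_xor,
            Nat.testBit_two_pow]
          by_cases hbe : i = b
          · subst hbe
            rw [hsi, hji]
            simp
          · simp [hbe]
        rw [hmask]
        exact hrest
    | u + 1 =>
      show PartC (s :: rest.set u (rest.getD u 0 ||| 2 ^ i)) (j ||| 2 ^ i)
      refine ⟨hs0, ?_, ?_, ?_⟩
      · apply Nat.eq_of_testBit_eq
        intro b
        have hb := congrArg (fun x => x.testBit b) hsub
        simp only [Nat.testBit_and] at hb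
        rw [Nat.testBit_and, Nat.testBit_or]
        cases hA : s.testBit b <;> cases hB : j.testBit b <;> simp_all
      · rw [hctzor]
        exact hctz
      · have hhigh' : ∀ b, (j ^^^ s).testBit b = true → b < i := by
          intro b hb
          rw [pv_xor_submask hsub] at hb
          exact hhigh b (by
            cases hj : j.testBit b with
            | true => rfl
            | false => rw [hj] at hb; simpa using hb)
        have hmask : (j ||| 2 ^ i) ^^^ s = (j ^^^ s) ||| 2 ^ i := by
          apply Nat.eq_of_testBit_eq
          intro b
          rw [Nat.testBit_xor, Nat.testBit_or, Nat.testBit_or, Nat.testBit_xor,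
            Nat.testBit_two_pow]
          by_cases hbe : i = b
          · subst hbe
            rw [hsi, hji]
            simp
          · simp [hbe]
        rw [hmask]
        exact ih (j ^^^ s) u hrest hhigh' (by simpa using hb0)

theorem pv_partC_append {i : Nat} :
    ∀ (ms : List Nat) (j : Nat), PartC ms j → (∀ b, j.testBit b = true → b < i) →
      PartC (ms ++ [2 ^ i]) (j ||| 2 ^ i) := by
  intro ms
  induction ms with
  | nil =>
    intro j h _
    subst h
    show PartC [2 ^ i] (0 ||| 2 ^ i)
    rw [Nat.zero_or]
    refine ⟨by positivity, Nat.and_self _, ?_, ?_⟩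
    · rw [pv_ctz_eq (x := 2 ^ i) (b := i) (Nat.testBit_two_pow_self)
        (fun b' hb' => by rw [Nat.testBit_two_pow]; simp; omega)]
      exact Nat.testBit_two_pow_self
    · show PartC [] (2 ^ i ^^^ 2 ^ i)
      rw [Nat.xor_self]
      rfl
  | cons s rest ih =>
    intro j h hhigh
    obtain ⟨hs0, hsub, hctz, hrest⟩ := h
    have hj0 : j ≠ 0 := by
      intro h0
      rw [h0, Nat.and_zero] at hsub
      exact hs0 hsub.symm
    have hctzor : pvGetFirst1Idx (j ||| 2 ^ i) = pvGetFirst1Idx j := pv_ctz_or_high hj0 hhigh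
    have hsi : s.testBit i = false := by
      cases hb : s.testBit i with
      | false => rfl
      | true =>
        have hbj := congrArg (fun x => x.testBit i) hsub
        simp only [Nat.testBit_and] at hbj
        rw [hb, pv_high_not_mem hhigh] at hbj
        simpa using hbj
    have hji : j.testBit i = false := pv_high_not_mem hhigh
    show PartC (s :: (rest ++ [2 ^ i])) (j ||| 2 ^ i)
    refine ⟨hs0, ?_, ?_, ?_⟩
    · apply Nat.eq_of_testBit_eq
      intro b
      have hb := congrArg (fun x => x.testBit b) hsub
      simp only [Nat.testBit_and] at hb
      rw [Nat.testBit_and, Nat.testBit_or]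
      cases hA : s.testBit b <;> cases hB : j.testBit b <;> simp_all
    · rw [hctzor]
      exact hctz
    · have hhigh' : ∀ b, (j ^^^ s).testBit b = true → b < i := by
        intro b hb
        rw [pv_xor_submask hsub] at hb
        exact hhigh b (by
          cases hj : j.testBit b with
          | true => rfl
          | false => rw [hj] at hb; simpa using hb)
      have hmask : (j ||| 2 ^ i) ^^^ s = (j ^^^ s) ||| 2 ^ i := by
        apply Nat.eq_of_testBit_eq
        intro b
        rw [Nat.testBit_xor, Nat.testBit_or, Nat.testBit_or, Nat.testBit_xor,
          Nat.testBit_two_pow]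
        by_cases hbe : i = b
        · subst hbe
          rw [hsi, hji]
          simp
        · simp [hbe]
      rw [hmask]
      exact ih (j ^^^ s) hrest hhigh'

-- ---------- B's search on block masks instead of loads ----------

theorem pv_union_append (l1 l2 : List Nat) :
    pvUnion (l1 ++ l2) = pvUnion l1 ||| pvUnion l2 := by
  induction l1 with
  | nil => show pvUnion l2 = 0 ||| pvUnion l2; rw [Nat.zero_or]
  | cons a t ih =>
    show a ||| pvUnion (t ++ l2) = (a ||| pvUnion t) ||| pvUnion l2
    rw [ih, Nat.or_assoc]

theorem pv_union_submask {l : List Nat} {j : Nat} (h : ∀ s ∈ l, s &&& j = s) :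
    pvUnion l &&& j = pvUnion l := by
  induction l with
  | nil => simp [pvUnion]
  | cons a t ih =>
    show (a ||| pvUnion t) &&& j = a ||| pvUnion t
    have h1 := h a (by simp)
    have h2 := ih (fun s hs => h s (by simp [hs]))
    apply Nat.eq_of_testBit_eq
    intro b
    have hb1 := congrArg (fun x => x.testBit b) h1
    have hb2 := congrArg (fun x => x.testBit b) h2
    simp only [Nat.testBit_and] at hb1 hb2
    simp only [Nat.testBit_and, Nat.testBit_or] at *
    cases hA : a.testBit b <;> cases hB : (pvUnion t).testBit b <;>
      cases hC : j.testBit b <;> simp_all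

-- the mirror of pvDfsB on the block masks (the loads are the masks' workloads)
def pvG (jobs : List Int) (w : Nat) : Nat → Nat → List Nat → Int
  | 0, _, ms => pvMaxW jobs ms
  | f+1, i, ms =>
      if i = jobs.length then pvMaxW jobs ms
      else (PySem.List.min? (((List.range ms.length).map (fun b =>
              pvG jobs w f (i+1) (ms.set b (ms.getD b 0 ||| 2 ^ i)))) ++
            (if ms.length < w then [pvG jobs w f (i+1) (ms ++ [2 ^ i])] else []))
          (fun y => y)).getD 0

theorem pv_bridge (jobs : List Int) (w : Nat) :
    ∀ f i (ms : List Nat), i ≤ jobs.length →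
      (∀ s ∈ ms, ∀ b, s.testBit b = true → b < i) →
      pvDfsB jobs w f i (ms.map (pvWB jobs)) = pvG jobs w f i ms := by
  intro f
  induction f with
  | zero => intro i ms _ _; rfl
  | succ f ih =>
    intro i ms hi hinv
    by_cases hieq : i = jobs.length
    · simp only [pvDfsB, pvG, if_pos hieq]
      rfl
    · have hilt : i < jobs.length := by omega
      simp only [pvDfsB, pvG, if_neg hieq]
      have hlen : (ms.map (pvWB jobs)).length = ms.length := by simp
      congr 2
      rw [hlen]
      congr 1
      · -- the per-bucket candidates agree
        apply List.map_congr_left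
        intro b hb
        have hblt : b < ms.length := List.mem_range.mp hb
        have hmem : ms[b] ∈ ms := List.getElem_mem hblt
        have hbit : (ms.getD b 0).testBit i = false := by
          rw [List.getD_eq_getElem ms 0 hblt]
          cases hx : ms[b].testBit i with
          | false => rfl
          | true => exact absurd (hinv _ hmem i hx) (lt_irrefl i)
        have hgd : (ms.map (pvWB jobs)).getD b 0 = pvWB jobs (ms.getD b 0) := by
          rw [List.getD_eq_getElem _ 0 (by omega), List.getElem_map,
            List.getD_eq_getElem ms 0 hblt]
        have hset : (ms.map (pvWB jobs)).set b ((ms.map (pvWB jobs)).getD b 0 + jobs.getD i 0) =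
            (ms.set b (ms.getD b 0 ||| 2 ^ i)).map (pvWB jobs) := by
          rw [hgd, List.map_set, pv_wb_or_bit jobs hilt hbit]
        rw [hset]
        apply ih (i + 1)
        · omega
        · intro s hs bb hsb
          rcases List.mem_or_eq_of_mem_set hs with hs' | rfl
          · exact lt_trans (hinv s hs' bb hsb) (by omega)
          · rw [Nat.testBit_or, Nat.testBit_two_pow] at hsb
            rcases Bool.or_eq_true_iff.mp hsb with h1 | h1
            · have := hinv _ (List.getElem_mem hblt) bb
              rw [List.getD_eq_getElem ms 0 hblt] at h1
              exact lt_trans (this h1) (by omega)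
            · have : i = bb := by simpa using h1
              omega
      · -- the new-bucket candidate agrees
        by_cases hc : ms.length < w
        · rw [if_pos hc, if_pos hc]
          have happ : (ms.map (pvWB jobs)) ++ [jobs.getD i 0] =
              (ms ++ [2 ^ i]).map (pvWB jobs) := by
            rw [List.map_append, List.map_cons, List.map_nil, pv_wb_pow jobs hilt]
          rw [happ]
          congr 1
          apply ih (i + 1)
          · omega
          · intro s hs bb hsb
            rcases List.mem_append.mp hs with hs' | hs'
            · exact lt_trans (hinv s hs' bb hsb) (by omega)
            · have hse : s = 2 ^ i := by simpa using hs'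
              subst hse
              rw [Nat.testBit_two_pow] at hsb
              have : i = bb := by simpa using hsb
              omega
        · rw [if_neg hc, if_neg hc]

-- lower bound: every state of the search is a canonical partial partition, so every
-- completion costs at least the spec optimum
theorem pv_low_or (i : Nat) : (2 ^ i - 1) ||| 2 ^ i = 2 ^ (i + 1) - 1 := by
  apply Nat.eq_of_testBit_eq
  intro b
  rw [Nat.testBit_or, Nat.testBit_two_pow_sub_one, Nat.testBit_two_pow_sub_one,
    Nat.testBit_two_pow]
  by_cases h1 : b < i
  · simp [h1]
    omega
  · by_cases h2 : b = i
    · subst h2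
      simp
    · have : ¬ b < i + 1 := by omega
      simp [h1, h2, this]
      omega

theorem pv_low_testBit {i b : Nat} (h : (2 ^ i - 1).testBit b = true) : b < i := by
  rwa [Nat.testBit_two_pow_sub_one, decide_eq_true_eq] at h

theorem pv_LB (jobs : List Int) (w : Nat) (hw : 1 ≤ w) (hjobs : jobs.length ≠ 0) :
    ∀ f i (ms : List Nat), i + f = jobs.length → PartC ms (2 ^ i - 1) → ms.length ≤ w →
      PspecC jobs (w - 1) (2 ^ jobs.length - 1) ≤ pvG jobs w f i ms := by
  intro f
  induction f with
  | zero =>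
    intro i ms hif hpart hlen
    have hieq : i = jobs.length := by omega
    subst hieq
    have hfull : (2 : Nat) ^ jobs.length - 1 ≠ 0 := by
      have : (2 : Nat) ^ jobs.length ≥ 2 ^ 1 := Nat.pow_le_pow_right (by omega) (by omega)
      omega
    exact pv_partC_bound jobs ms (w - 1) (2 ^ jobs.length - 1) hpart hfull (by omega)
  | succ f ih =>
    intro i ms hif hpart hlen
    have hieq : i ≠ jobs.length := by omega
    simp only [pvG, if_neg hieq]
    apply pv_le_pyMin
    · -- the candidate list is nonempty
      intro hnil
      rcases List.append_eq_nil_iff.mp hnil with ⟨h1, h2⟩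
      have hms : ms = [] := by
        by_contra hms
        have : ms.length ≠ 0 := fun h => hms (List.eq_nil_of_length_eq_zero h)
        have : List.range ms.length ≠ [] := by
          simp [List.range_eq_nil]
          omega
        exact this (List.map_eq_nil_iff.mp h1 ▸ by simp_all)
      subst hms
      rw [if_pos (by simpa using hw)] at h2
      exact absurd h2 (by simp)
    · intro x hx
      rcases List.mem_append.mp hx with hx' | hx'
      · obtain ⟨b, hb, rfl⟩ := List.mem_map.mp hx'
        have hblt : b < ms.length := List.mem_range.mp hb
        apply ih (i + 1)
        · omega
        · rw [← pv_low_or i]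
          exact pv_partC_addbit ms (2 ^ i - 1) b hpart (fun b hb => pv_low_testBit hb) hblt
        · simpa using hlen
      · by_cases hc : ms.length < w
        · rw [if_pos hc] at hx'
          have hxe : x = pvG jobs w f (i + 1) (ms ++ [2 ^ i]) := by simpa using hx'
          subst hxe
          apply ih (i + 1)
          · omega
          · rw [← pv_low_or i]
            exact pv_partC_append ms (2 ^ i - 1) hpart (fun b hb => pv_low_testBit hb)
          · simpa using hc
        · rw [if_neg hc] at hx'
          simp at hx'

-- upper bound: the run that follows a fixed canonical partition reaches exactly it
theorem pv_UB (jobs : List Int) (w : Nat) (ps : List Nat)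
    (hps : PartC ps (2 ^ jobs.length - 1)) (hlen : ps.length ≤ w) :
    ∀ f i c, i + f = jobs.length → c ≤ ps.length →
      (∀ b, b < i → ((2 ^ jobs.length - 1) ^^^ pvUnion (ps.take c)).testBit b = false) →
      pvG jobs w f i ((ps.take c).map (fun s => s &&& (2 ^ i - 1))) ≤ pvMaxW jobs ps := by
  have hsubfull : ∀ s ∈ ps, s &&& (2 ^ jobs.length - 1) = s := pv_partC_submask hps
  intro f
  induction f with
  | zero =>
    intro i c hif hc hinv
    have hieq : i = jobs.length := by omega
    subst hieq
    have husub : pvUnion (ps.take c) &&& (2 ^ jobs.length - 1) = pvUnion (ps.take c) :=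
      pv_union_submask (fun s hs => hsubfull s (List.mem_of_mem_take hs))
    have hrem : (2 ^ jobs.length - 1) ^^^ pvUnion (ps.take c) = 0 := by
      apply Nat.eq_of_testBit_eq
      intro b
      by_cases hb : b < jobs.length
      · rw [hinv b hb, Nat.zero_testBit]
      · rw [Nat.zero_testBit, pv_xor_submask husub, Nat.testBit_two_pow_sub_one]
        simp [hb]
    have hceq : c = ps.length := by
      have hdrop := pv_partC_drop c hps
      rw [hrem] at hdrop
      cases hd : ps.drop c with
      | nil =>
        have := List.drop_eq_nil_iff.mp hd
        omega
      | cons a t =>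
        rw [hd] at hdrop
        obtain ⟨ha0, hasub, -, -⟩ := hdrop
        rw [Nat.and_zero] at hasub
        exact absurd hasub.symm ha0
    subst hceq
    rw [List.take_length]
    have hmapeq : ps.map (fun s => s &&& (2 ^ jobs.length - 1)) = ps := by
      have := List.map_congr_left (fun s hs => hsubfull s hs)
      rw [this]
      exact List.map_id ps
    rw [show pvG jobs w 0 jobs.length (ps.map (fun s => s &&& (2 ^ jobs.length - 1))) =
      pvMaxW jobs (ps.map (fun s => s &&& (2 ^ jobs.length - 1))) from rfl, hmapeq]
  | succ f ih =>
    intro i c hif hc hinv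
    have hieq : i ≠ jobs.length := by omega
    have hilt : i < jobs.length := by omega
    simp only [pvG, if_neg hieq]
    have hulen : (ps.take c).length = c := List.length_take_of_le hc
    have hmslen : ((ps.take c).map (fun s => s &&& (2 ^ i - 1))).length = c := by
      rw [List.length_map, hulen]
    have husub : pvUnion (ps.take c) &&& (2 ^ jobs.length - 1) = pvUnion (ps.take c) :=
      pv_union_submask (fun s hs => hsubfull s (List.mem_of_mem_take hs))
    by_cases hbi : ((2 ^ jobs.length - 1) ^^^ pvUnion (ps.take c)).testBit i = true
    · -- the job at index i opens the next block of ps: take the new-bucket branch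
      have hclt : c < ps.length := by
        rcases Nat.lt_or_ge c ps.length with h | h
        · exact h
        · exfalso
          have hceq : c = ps.length := by omega
          subst hceq
          rw [List.take_length, pv_partC_union hps, Nat.xor_self, Nat.zero_testBit] at hbi
          exact Bool.false_ne_true hbi
      have hdrop := pv_partC_drop c hps
      rw [List.drop_eq_getElem_cons hclt] at hdrop
      obtain ⟨hc0, hcsub, hcctz, -⟩ := hdrop
      have hremlow : ∀ b, b < i →
          ((2 ^ jobs.length - 1) ^^^ pvUnion (ps.take c)).testBit b = false := hinv
      have hctzrem : pvGetFirst1Idx ((2 ^ jobs.length - 1) ^^^ pvUnion (ps.take c)) = i :=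
        pv_ctz_eq hbi (fun b' hb' => hremlow b' hb')
      have hsci : ps[c].testBit i = true := by
        rw [← hctzrem]
        exact hcctz
      have hsclow : ∀ b, b < i → ps[c].testBit b = false := by
        intro b hb
        have := congrArg (fun x => x.testBit b) hcsub
        simp only [Nat.testBit_and] at this
        rw [hremlow b hb, Bool.and_false] at this
        exact this.symm
      have hui : (pvUnion (ps.take c)).testBit i = false := by
        have := pv_xor_submask husub i
        rw [hbi] at this
        cases hu : (pvUnion (ps.take c)).testBit i with
        | false => rfl
        | true => rw [hu] at this; simp at this
      have htakebit : ∀ s ∈ ps.take c, s.testBit i = false := by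
        intro s hs
        cases hsb : s.testBit i with
        | false => rfl
        | true =>
          have : (pvUnion (ps.take c)).testBit i = true := by
            rw [pv_union_testBit]
            exact List.any_eq_true.mpr ⟨s, hs, hsb⟩
          rw [this] at hui
          exact absurd hui (by simp)
      -- the appended bucket list is the restriction of the first c+1 blocks
      have hms' : ((ps.take c).map (fun s => s &&& (2 ^ i - 1))) ++ [2 ^ i] =
          (ps.take (c + 1)).map (fun s => s &&& (2 ^ (i + 1) - 1)) := by
        rw [List.take_succ, List.getElem?_eq_getElem hclt]
        simp only [Option.toList_some, List.map_append, List.map_cons, List.map_nil]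
        congr 1
        · apply List.map_congr_left
          intro s hs
          apply Nat.eq_of_testBit_eq
          intro b
          rw [Nat.testBit_and, Nat.testBit_and, Nat.testBit_two_pow_sub_one,
            Nat.testBit_two_pow_sub_one]
          by_cases hb : b = i
          · subst hb
            rw [htakebit s hs]
            simp
          · by_cases hb' : b < i
            · have : b < i + 1 := by omega
              simp [hb', this]
            · have h1 : ¬ b < i + 1 := by omega
              simp [hb', h1]
        · congr 1
          apply Nat.eq_of_testBit_eq
          intro b
          rw [Nat.testBit_and, Nat.testBit_two_pow_sub_one, Nat.testBit_two_pow]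
          by_cases hb : b = i
          · subst hb
            rw [hsci]
            simp
          · by_cases hb' : b < i
            · rw [hsclow b hb']
              simp
              omega
            · have h1 : ¬ b < i + 1 := by omega
              simp [h1]
              omega
      have hinv' : ∀ b, b < i + 1 →
          ((2 ^ jobs.length - 1) ^^^ pvUnion (ps.take (c + 1))).testBit b = false := by
        intro b hb
        have hu' : pvUnion (ps.take (c + 1)) = pvUnion (ps.take c) ||| ps[c] := by
          rw [List.take_succ, List.getElem?_eq_getElem hclt]
          simp only [Option.toList_some, pv_union_append]
          simp [pvUnion]
        rw [hu', Nat.testBit_xor, Nat.testBit_or]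
        by_cases hbe : b = i
        · subst hbe
          rw [hsci, hui]
          have hfb : (2 ^ jobs.length - 1).testBit b = true := by
            rw [Nat.testBit_two_pow_sub_one]
            simp
            omega
          rw [hfb]
          rfl
        · have hblt : b < i := by omega
          have := hinv b hblt
          rw [Nat.testBit_xor] at this
          cases hf : (2 ^ jobs.length - 1).testBit b <;>
            cases hu2 : (pvUnion (ps.take c)).testBit b <;>
              cases hp : ps[c].testBit b <;> simp_all [hsclow b hblt]
      have hcand := ih (i + 1) (c + 1) (by omega) (by omega) hinv'
      rw [← hms'] at hcand
      apply le_trans (pv_pyMin_le ?_) hcand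
      apply List.mem_append_right
      rw [if_pos (by rw [hmslen]; omega)]
      simp
    · -- the job at index i extends the unique already-open block containing it
      have hbi' : ((2 ^ jobs.length - 1) ^^^ pvUnion (ps.take c)).testBit i = false := by
        cases h : ((2 ^ jobs.length - 1) ^^^ pvUnion (ps.take c)).testBit i with
        | false => rfl
        | true => exact absurd h hbi
      have hfi : (2 ^ jobs.length - 1).testBit i = true := by
        rw [Nat.testBit_two_pow_sub_one]
        simp
        omega
      have hui : (pvUnion (ps.take c)).testBit i = true := by
        have := pv_xor_submask husub i
        rw [hbi', hfi] at this
        cases hu : (pvUnion (ps.take c)).testBit i with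
        | true => rfl
        | false => rw [hu] at this; simp at this
      rw [pv_union_testBit] at hui
      obtain ⟨s0, hs0mem, hs0bit⟩ := List.any_eq_true.mp hui
      obtain ⟨t, ht, hts⟩ := List.mem_iff_getElem.mp hs0mem
      have hpair : (ps.take c).Pairwise (fun a b => a &&& b = 0) :=
        (pv_partC_pairwise hps).sublist (List.take_sublist c ps)
      have hother : ∀ v, v < c → v ≠ t → (ps.take c)[v]!.testBit i = false := by
        intro v hv hvt
        have hv' : v < (ps.take c).length := by omega
        rw [getElem!_pos (ps.take c) v hv']
        have hdisj : (ps.take c)[v] &&& (ps.take c)[t] = 0 := by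
          rcases Nat.lt_or_ge v t with hlt | hge
          · exact (List.pairwise_iff_getElem.mp hpair) v t hv' ht hlt
          · have : t < v := by omega
            have := (List.pairwise_iff_getElem.mp hpair) t v ht hv' this
            rwa [Nat.and_comm] at this
        have hb := congrArg (fun x => x.testBit i) hdisj
        simp only [Nat.testBit_and, Nat.zero_testBit] at hb
        rw [hts, hs0bit, Bool.and_true] at hb
        exact hb
      -- choosing bucket t yields the restriction of the same c blocks one step later
      have hms' : ((ps.take c).map (fun s => s &&& (2 ^ i - 1))).set t
            ((((ps.take c).map (fun s => s &&& (2 ^ i - 1))).getD t 0) ||| 2 ^ i) =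
          (ps.take c).map (fun s => s &&& (2 ^ (i + 1) - 1)) := by
        apply List.ext_getElem
        · simp
        · intro v h1 h2
          have hv : v < (ps.take c).length := by simpa using h2
          rw [List.getElem_map]
          by_cases hvt : v = t
          · subst hvt
            rw [List.getElem_set_self (by simpa using hv)]
            rw [List.getD_eq_getElem _ 0 (by simpa using hv), List.getElem_map]
            apply Nat.eq_of_testBit_eq
            intro b
            rw [Nat.testBit_or, Nat.testBit_and, Nat.testBit_and,
              Nat.testBit_two_pow_sub_one, Nat.testBit_two_pow_sub_one, Nat.testBit_two_pow]
            by_cases hb : b = i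
            · subst hb
              rw [hts, hs0bit]
              simp
            · by_cases hb' : b < i
              · have : b < i + 1 := by omega
                simp [hb', this]
                omega
              · have h1 : ¬ b < i + 1 := by omega
                simp [hb', h1]
                omega
          · rw [List.getElem_set_ne (by omega)]
            rw [List.getElem_map]
            have hvi : (ps.take c)[v].testBit i = false := by
              have := hother v (by omega) hvt
              rwa [getElem!_pos (ps.take c) v hv] at this
            apply Nat.eq_of_testBit_eq
            intro b
            rw [Nat.testBit_and, Nat.testBit_and, Nat.testBit_two_pow_sub_one,
              Nat.testBit_two_pow_sub_one]
            by_cases hb : b = i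
            · subst hb
              rw [hvi]
              simp
            · by_cases hb' : b < i
              · have : b < i + 1 := by omega
                simp [hb', this]
              · have h1 : ¬ b < i + 1 := by omega
                simp [hb', h1]
      have hinv' : ∀ b, b < i + 1 →
          ((2 ^ jobs.length - 1) ^^^ pvUnion (ps.take c)).testBit b = false := by
        intro b hb
        by_cases hbe : b = i
        · subst hbe
          exact hbi'
        · exact hinv b (by omega)
      have hcand := ih (i + 1) c (by omega) hc hinv'
      rw [← hms'] at hcand
      apply le_trans (pv_pyMin_le ?_) hcand
      apply List.mem_append_left
      apply List.mem_map.mpr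
      exact ⟨t, List.mem_range.mpr (by omega), rfl⟩

-- B's port computes the same canonical partition minimax, with budget w = max(k,1)
theorem pv_B_spec (jobs : List Int) (k : Int) (hne : jobs.length ≠ 0) :
    minimumTimeRequired_2_alt jobs k =
      PspecC jobs ((max k 1).toNat - 1) (2 ^ jobs.length - 1) := by
  have hw : 1 ≤ (max k 1).toNat := by
    have : (1 : Int) ≤ max k 1 := le_max_right k 1
    omega
  have hfull : (2 : Nat) ^ jobs.length - 1 ≠ 0 := by
    have : (2 : Nat) ^ jobs.length ≥ 2 ^ 1 := Nat.pow_le_pow_right (by omega) (by omega)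
    omega
  show (if jobs.length = 0 then 0 else pvDfsB jobs (max k 1).toNat jobs.length 0 []) = _
  rw [if_neg hne]
  have hbr := pv_bridge jobs (max k 1).toNat jobs.length 0 [] (by omega) (by simp)
  simp only [List.map_nil] at hbr
  rw [hbr]
  apply le_antisymm
  · obtain ⟨ps, hp, hplen, hpval⟩ :=
      pv_partC_attain jobs ((max k 1).toNat - 1) (2 ^ jobs.length - 1) hfull
    have hub := pv_UB jobs (max k 1).toNat ps hp (by omega) jobs.length 0 0 (by omega)
      (by omega) (by intro b hb; omega)
    simp only [List.take_zero, List.map_nil] at hub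
    rw [hpval] at hub
    exact hub
  · exact pv_LB jobs (max k 1).toNat hw hne jobs.length 0 [] (by omega)
      (by show PartC [] (2 ^ 0 - 1); rfl) (by simp)

-- ===== VERDICT (by name: the statement is the Claim_ definition above) =====
theorem minimumTimeRequired_2_spec : Claim_equal_minimumTimeRequired_2 := by
  intro jobs k _
  unfold Spec_minimumTimeRequired_2
  by_cases h : jobs.length = 0
  · rw [pv_A_spec]
    have h0 : (2 : Nat) ^ jobs.length - 1 = 0 := by rw [h]; rfl
    rw [h0, pv_PspecC_zero]
    show (0 : Int) = if jobs.length = 0 then 0 else _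
    rw [if_pos h]
  · rw [pv_A_spec, pv_B_spec jobs k h]
    congr 1
    rcases max_cases k 1 with ⟨hm, hk⟩ | ⟨hm, hk⟩ <;> rw [hm] <;> omega
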